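-- pv_equiv track=rewrite | github.com/jjoshua2/arc_agi | unsolved/2025-10-03T22-44-17Z/InsideOutsideMinimal_best1.py | transform
-- ===== SOURCE A (Python) =====
-- from collections import deque
-- from typing import List
--
-- def transform(grid_lst: List[List[int]]) -> List[List[int]]:
--     if not grid_lst:
--         return []
--     rows = len(grid_lst)
--     if rows == 0:
--         return []
--     cols = len(grid_lst[0])
--     input_grid = grid_lst
--     output = [row[:] for row in input_grid]
--     visited = [[False] * cols for _ in range(rows)]
--     directions = [(-1, 0), (1, 0), (0, -1), (0, 1)]
--
--     def bfs(start_r: int, start_c: int, color: int) -> List[tuple[int, int]]: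
--         queue = deque([(start_r, start_c)])
--         visited[start_r][start_c] = True
--         component = [(start_r, start_c)]
--         while queue:
--             r, c = queue.popleft()
--             for dr, dc in directions:
--                 nr, nc = r + dr, c + dc
--                 if 0 <= nr < rows and 0 <= nc < cols and not visited[nr][nc] and input_grid[nr][nc] == color:
--                     visited[nr][nc] = True
--                     queue.append((nr, nc))
--                     component.append((nr, nc))
--         return component
--
--     for i in range(rows):
--         for j in range(cols):
--             if input_grid[i][j] != 0 and not visited[i][j]:
--                 color = input_grid[i][j]
--                 component = bfs(i, j, color)
--                 rs = [pos[0] for pos in component]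
--                 cs = [pos[1] for pos in component]
--                 min_r = min(rs)
--                 max_r = max(rs)
--                 min_c = min(cs)
--                 max_c = max(cs)
--                 h = max_r - min_r + 1
--                 w = max_c - min_c + 1
--                 perimeter = 2 * (h + w) - 4
--                 if h >= 3 and w >= 3 and len(component) == perimeter:
--                     # Clear interior
--                     for ir in range(min_r + 1, max_r):
--                         for ic in range(min_c + 1, max_c):
--                             output[ir][ic] = 0
--     return output
-- ===== SOURCE B (Python) =====
-- def transform(grid_lst):
--     if not grid_lst:
--         return []
--     rows = len(grid_lst)
--     cols = len(grid_lst[0])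
--     n = rows * cols
--
--     # union-find over flattened cell indices; union-by-smaller-index keeps
--     # every root the minimal (row-major) cell of its component
--     parent = list(range(n))
--
--     def find(x):
--         while parent[x] != x:
--             x = parent[x]
--         return x
--
--     def union(a, b):
--         ra, rb = find(a), find(b)
--         if ra != rb:
--             parent[max(ra, rb)] = min(ra, rb)
--
--     for k in range(n):
--         i, j = divmod(k, cols)
--         v = grid_lst[i][j]
--         if v != 0:
--             if i + 1 < rows and grid_lst[i + 1][j] == v:
--                 union(k, k + cols)
--             if j + 1 < cols and grid_lst[i][j + 1] == v:
--                 union(k, k + 1)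
--
--     interior = set()
--     for k in range(n):
--         if grid_lst[k // cols][k % cols] != 0 and find(k) == k:
--             comp = [(t // cols, t % cols) for t in range(n)
--                     if grid_lst[t // cols][t % cols] != 0 and find(t) == k]
--             rs = [p[0] for p in comp]
--             cs = [p[1] for p in comp]
--             min_r, max_r = min(rs), max(rs)
--             min_c, max_c = min(cs), max(cs)
--             h = max_r - min_r + 1
--             w = max_c - min_c + 1
--             if h >= 3 and w >= 3 and len(comp) == 2 * (h + w) - 4:
--                 for ir in range(min_r + 1, max_r):
--                     for ic in range(min_c + 1, max_c):
--                         interior.add((ir, ic))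
--     return [[0 if (i, j) in interior else v for j, v in enumerate(row)]
--             for i, row in enumerate(grid_lst)]
-- ===== Notes on version B (the rewrite author's own statement) =====
-- stated objective: alternative
-- what changed: Replaces A's per-component BFS flood fill with a visited matrix by a union-find (disjoint-set forest) over flattened cell indices: one pass unions each non-zero cell with its equal-colored right and down neighbors (union by smaller root, so every root is its component's row-major minimum), a second pass gathers each root's component by scanning roots, applies the same bounding-box/perimeter hollow-rectangle test, and the grid is rebuilt pointwise from one set of interior cells.
import Mathlib
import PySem

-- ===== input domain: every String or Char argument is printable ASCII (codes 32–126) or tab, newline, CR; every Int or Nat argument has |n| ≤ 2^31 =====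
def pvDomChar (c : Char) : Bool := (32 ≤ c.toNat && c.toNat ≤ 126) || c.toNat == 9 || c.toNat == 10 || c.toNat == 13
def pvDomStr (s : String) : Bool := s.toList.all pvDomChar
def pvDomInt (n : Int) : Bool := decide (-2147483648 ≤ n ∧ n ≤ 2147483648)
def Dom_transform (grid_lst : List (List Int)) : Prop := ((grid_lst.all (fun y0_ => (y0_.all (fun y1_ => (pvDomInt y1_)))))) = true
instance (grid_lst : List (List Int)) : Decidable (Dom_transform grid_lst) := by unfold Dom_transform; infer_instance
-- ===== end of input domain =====

-- B replaces A's BFS flood fill (shared visited matrix, per-component queue) by a union-find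
-- (disjoint-set forest) over flattened cell indices with union-by-smaller-root, a per-root
-- component collection pass, and a pointwise rebuild of the grid; objective: alternative (not faster).

-- ===== PORT A =====
def minN : List Nat → Nat
  | [] => 0
  | x :: xs => xs.foldl Nat.min x

def maxN : List Nat → Nat
  | [] => 0
  | x :: xs => xs.foldl Nat.max x

def cellA (g : List (List Int)) (r c : Nat) : Int := (g.getD r []).getD c 0

-- the four direction candidates (-1,0),(1,0),(0,-1),(0,1) with the 0<=nr<rows / 0<=nc<cols bounds check
def candsA (rows cols r c : Nat) : List (Nat × Nat) :=
  (if 1 ≤ r then [(r - 1, c)] else []) ++ (if r + 1 < rows then [(r + 1, c)] else []) ++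
  (if 1 ≤ c then [(r, c - 1)] else []) ++ (if c + 1 < cols then [(r, c + 1)] else [])

-- one neighbour test of A's bfs: if not visited and grid colour matches, mark visited, enqueue, append
def bfsPushA (g : List (List Int)) (color : Int)
    (st : PySem.Set (Nat × Nat) × List (Nat × Nat) × List (Nat × Nat)) (n : Nat × Nat) :
    PySem.Set (Nat × Nat) × List (Nat × Nat) × List (Nat × Nat) :=
  if n ∉ st.1 ∧ cellA g n.1 n.2 = color then (PySem.Set.add st.1 n, st.2.1 ++ [n], st.2.2 ++ [n])
  else st

-- A's 'while queue' loop; the fuel only makes the recursion structural, rows*cols+1 is never exhausted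
def bfsLoopA (g : List (List Int)) (rows cols : Nat) (color : Int) :
    Nat → List (Nat × Nat) → PySem.Set (Nat × Nat) → List (Nat × Nat) →
    PySem.Set (Nat × Nat) × List (Nat × Nat)
  | _, [], vis, comp => (vis, comp)
  | 0, _ :: _, vis, comp => (vis, comp)
  | fuel + 1, p :: queue, vis, comp =>
    let st := (candsA rows cols p.1 p.2).foldl (bfsPushA g color) (vis, queue, comp)
    bfsLoopA g rows cols color fuel st.2.1 st.1 st.2.2

def clearRowA (out : List (List Int)) (ir minC maxC : Nat) : List (List Int) :=
  (List.range' (minC + 1) (maxC - minC - 1)).foldl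
    (fun o ic => o.modify ir (fun row => row.set ic 0)) out

def clearRectA (out : List (List Int)) (minR maxR minC maxC : Nat) : List (List Int) :=
  (List.range' (minR + 1) (maxR - minR - 1)).foldl (fun o ir => clearRowA o ir minC maxC) out

def scanCellA (g : List (List Int)) (rows cols : Nat)
    (st : PySem.Set (Nat × Nat) × List (List Int)) (i j : Nat) :
    PySem.Set (Nat × Nat) × List (List Int) :=
  if cellA g i j ≠ 0 ∧ (i, j) ∉ st.1 then
    let color := cellA g i j
    let r := bfsLoopA g rows cols color (rows * cols + 1) [(i, j)] (PySem.Set.add st.1 (i, j)) [(i, j)]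
    let comp := r.2
    let minR := minN (comp.map Prod.fst)
    let maxR := maxN (comp.map Prod.fst)
    let minC := minN (comp.map Prod.snd)
    let maxC := maxN (comp.map Prod.snd)
    let h := maxR - minR + 1
    let w := maxC - minC + 1
    if 3 ≤ h ∧ 3 ≤ w ∧ comp.length = 2 * (h + w) - 4 then
      (r.1, clearRectA st.2 minR maxR minC maxC)
    else (r.1, st.2)
  else st

def transform (grid_lst : List (List Int)) : List (List Int) :=
  if grid_lst = [] then []
  else
    let rows := grid_lst.length
    let cols := (grid_lst.headD []).length
    ((List.range rows).foldl (fun st i =>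
      (List.range cols).foldl (fun st j => scanCellA grid_lst rows cols st i j) st)
      (PySem.Set.empty, grid_lst)).2

-- ===== PORT B =====
-- B's find: follow parent pointers to the root.  The fuel x+1 is exact: union-by-smaller-root
-- keeps parent[y] <= y, so the chain from x strictly decreases and Python's 'while' terminates.
def ufFind (parent : List Nat) : Nat → Nat → Nat
  | 0, x => x
  | fuel + 1, x => if parent.getD x x = x then x else ufFind parent fuel (parent.getD x x)

def ufUnion (parent : List Nat) (a b : Nat) : List Nat :=
  let ra := ufFind parent (a + 1) a
  let rb := ufFind parent (b + 1) b
  if ra = rb then parent else parent.set (Nat.max ra rb) (Nat.min ra rb)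

-- grid value at flattened index k; divmod(k, cols) is Nat division (k, cols nonnegative — exact)
def valB (g : List (List Int)) (cols k : Nat) : Int := (g.getD (k / cols) []).getD (k % cols) 0

-- B's first pass at cell k: union with the equal-colored down neighbour, then right neighbour
def linkCell (g : List (List Int)) (rows cols : Nat) (parent : List Nat) (k : Nat) : List Nat :=
  if valB g cols k ≠ 0 then
    let p1 := if k / cols + 1 < rows ∧ valB g cols (k + cols) = valB g cols k then
        ufUnion parent k (k + cols) else parent
    if k % cols + 1 < cols ∧ valB g cols (k + 1) = valB g cols k then ufUnion p1 k (k + 1) else p1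
  else parent

def interiorCells (minR maxR minC maxC : Nat) : List (Nat × Nat) :=
  (List.range' (minR + 1) (maxR - minR - 1)).flatMap (fun ir =>
    (List.range' (minC + 1) (maxC - minC - 1)).map (fun ic => (ir, ic)))

-- B's second pass at cell k: a root of a non-zero component gathers its whole group
def collectB (g : List (List Int)) (rows cols : Nat) (parent : List Nat)
    (acc : PySem.Set (Nat × Nat)) (k : Nat) : PySem.Set (Nat × Nat) :=
  if valB g cols k ≠ 0 ∧ ufFind parent (k + 1) k = k then
    let comp := ((List.range (rows * cols)).filter
        (fun t => decide (valB g cols t ≠ 0 ∧ ufFind parent (t + 1) t = k))).map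
        (fun t => (t / cols, t % cols))
    let minR := (PySem.List.min? (comp.map Prod.fst) (fun x => x)).getD 0
    let maxR := (PySem.List.max? (comp.map Prod.fst) (fun x => x)).getD 0
    let minC := (PySem.List.min? (comp.map Prod.snd) (fun x => x)).getD 0
    let maxC := (PySem.List.max? (comp.map Prod.snd) (fun x => x)).getD 0
    let h := maxR - minR + 1
    let w := maxC - minC + 1
    if 3 ≤ h ∧ 3 ≤ w ∧ comp.length = 2 * (h + w) - 4 then
      PySem.Set.update acc (interiorCells minR maxR minC maxC)
    else acc
  else acc

def transform_alt (grid_lst : List (List Int)) : List (List Int) :=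
  if grid_lst = [] then []
  else
    let rows := grid_lst.length
    let cols := (grid_lst.headD []).length
    let n := rows * cols
    let parent := (List.range n).foldl (linkCell grid_lst rows cols) (List.range n)
    let interior := (List.range n).foldl (collectB grid_lst rows cols parent) PySem.Set.empty
    grid_lst.mapIdx (fun i row => row.mapIdx (fun j v => if (i, j) ∈ interior then 0 else v))

-- ===== PRECONDITION & SPEC =====
-- Pre_ excludes exactly the ragged grids on which A raises IndexError: some row shorter than row 0
-- (A reads input_grid[i][j] for every j < len(grid_lst[0])).
def Pre_transform (grid_lst : List (List Int)) : Prop :=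
  ∀ row ∈ grid_lst, (grid_lst.headD []).length ≤ row.length
instance (grid_lst : List (List Int)) : Decidable (Pre_transform grid_lst) := by
  unfold Pre_transform; infer_instance

def pvWitness_transform : List (List Int) := [[1, 1, 1], [1, 0, 1], [1, 1, 1]]

def Spec_transform (grid_lst : List (List Int)) (out : List (List Int)) : Prop := out = transform_alt grid_lst
instance (grid_lst : List (List Int)) (out : List (List Int)) : Decidable (Spec_transform grid_lst out) := by unfold Spec_transform; infer_instance

-- ===== CLAIM (what is proved, stated in full; the proofs are below) =====
def Claim_equal_transform : Prop := ∀ (grid_lst : List (List Int)), Dom_transform grid_lst → Pre_transform grid_lst → Spec_transform grid_lst (transform grid_lst)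

-- ===== LEMMAS AND PROOFS =====
-- ---- union-find lemmas ----
def ufInv (parent : List Nat) : Prop := ∀ x, parent.getD x x ≤ x

def ufR (parent : List Nat) (x : Nat) : Nat := ufFind parent (x + 1) x

theorem ufFind_fuel {p : List Nat} (hinv : ufInv p) :
    ∀ x fuel, x < fuel → ufFind p fuel x = ufR p x := by
  intro x
  induction x using Nat.strong_induction_on with
  | _ x ih =>
    intro fuel hx
    match fuel, hx with
    | f + 1, hx =>
      show (if p.getD x x = x then x else ufFind p f (p.getD x x)) = ufR p x
      rw [show ufR p x = (if p.getD x x = x then x else ufFind p x (p.getD x x)) from rfl]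
      by_cases hr : p.getD x x = x
      · rw [if_pos hr, if_pos hr]
      · have hlt : p.getD x x < x := lt_of_le_of_ne (hinv x) hr
        rw [if_neg hr, if_neg hr, ih _ hlt f (by omega), ih _ hlt x (by omega)]

theorem ufR_of_root {p : List Nat} {x : Nat} (h : p.getD x x = x) : ufR p x = x := by
  show (if p.getD x x = x then x else ufFind p x (p.getD x x)) = x
  rw [if_pos h]

theorem ufR_step {p : List Nat} (hinv : ufInv p) {x : Nat} (h : p.getD x x ≠ x) :
    ufR p x = ufR p (p.getD x x) := by
  have hlt : p.getD x x < x := lt_of_le_of_ne (hinv x) h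
  show (if p.getD x x = x then x else ufFind p x (p.getD x x)) = ufR p (p.getD x x)
  rw [if_neg h, ufFind_fuel hinv _ x hlt]

theorem ufR_spec {p : List Nat} (hinv : ufInv p) :
    ∀ x, p.getD (ufR p x) (ufR p x) = ufR p x ∧ ufR p x ≤ x := by
  intro x
  induction x using Nat.strong_induction_on with
  | _ x ih =>
    by_cases hr : p.getD x x = x
    · rw [ufR_of_root hr]; exact ⟨hr, le_refl x⟩
    · have hlt : p.getD x x < x := lt_of_le_of_ne (hinv x) hr
      rw [ufR_step hinv hr]
      obtain ⟨h1, h2⟩ := ih _ hlt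
      exact ⟨h1, le_trans h2 (le_of_lt hlt)⟩

theorem ufR_idem {p : List Nat} (hinv : ufInv p) (x : Nat) : ufR p (ufR p x) = ufR p x :=
  ufR_of_root (ufR_spec hinv x).1

theorem getD_set_self (p : List Nat) (M m y : Nat) (hlen : M < p.length) :
    (p.set M m).getD y y = if y = M then m else p.getD y y := by
  by_cases hy : y < p.length
  · rw [List.getD_eq_getElem _ _ (by simpa using hy), List.getElem_set]
    by_cases h : y = M
    · subst h; rw [if_pos rfl, if_pos rfl]
    · rw [if_neg (fun h' => h h'.symm), if_neg h, List.getD_eq_getElem _ _ hy]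
  · have hne : y ≠ M := by omega
    rw [if_neg hne, List.getD_eq_default _ _ (by simpa using hy),
      List.getD_eq_default _ _ (by simpa using hy)]

theorem ufR_set {p : List Nat} (hinv : ufInv p) {M m : Nat}
    (hM : p.getD M M = M) (hm : p.getD m m = m) (hmM : m < M) (hlen : M < p.length) :
    ufInv (p.set M m) ∧ ∀ x, ufR (p.set M m) x = if ufR p x = M then m else ufR p x := by
  have hget : ∀ y, (p.set M m).getD y y = if y = M then m else p.getD y y :=
    fun y => getD_set_self p M m y hlen
  have hinv' : ufInv (p.set M m) := by
    intro y
    rw [hget y]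
    by_cases h : y = M
    · subst h; rw [if_pos rfl]; omega
    · rw [if_neg h]; exact hinv y
  refine ⟨hinv', ?_⟩
  intro x
  induction x using Nat.strong_induction_on with
  | _ x ih =>
    by_cases hxM : x = M
    · have h1 : (p.set M m).getD x x = m := by rw [hget, if_pos hxM]
      have h2 : (p.set M m).getD x x ≠ x := by rw [h1]; omega
      rw [ufR_step hinv' h2, h1, ufR_of_root (by rw [hget]; rw [if_neg (by omega)]; exact hm),
        hxM, ufR_of_root hM, if_pos rfl]
    · have hgx : (p.set M m).getD x x = p.getD x x := by rw [hget, if_neg hxM]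
      by_cases hr : p.getD x x = x
      · rw [ufR_of_root (by rw [hgx]; exact hr), ufR_of_root hr, if_neg hxM]
      · have hlt : p.getD x x < x := lt_of_le_of_ne (hinv x) hr
        rw [ufR_step hinv' (by rw [hgx]; exact hr), hgx, ih _ hlt, ufR_step hinv hr]

theorem natMinMax (a b : Nat) : (Nat.max a b = a ∨ Nat.max a b = b) ∧
    (Nat.min a b = a ∨ Nat.min a b = b) ∧ a ≤ Nat.max a b ∧ b ≤ Nat.max a b ∧
    Nat.min a b ≤ a ∧ Nat.min a b ≤ b := by
  simp only [Nat.max, Nat.min]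
  exact ⟨max_choice a b, min_choice a b, le_max_left a b, le_max_right a b,
    min_le_left a b, min_le_right a b⟩

theorem ufUnion_spec {p : List Nat} (hinv : ufInv p) {a b : Nat}
    (ha : a < p.length) (hb : b < p.length) :
    ufInv (ufUnion p a b) ∧ (ufUnion p a b).length = p.length ∧
    ∀ x, ufR (ufUnion p a b) x =
      if ufR p x = ufR p a ∨ ufR p x = ufR p b then Nat.min (ufR p a) (ufR p b) else ufR p x := by
  have hUn : ufUnion p a b = if ufR p a = ufR p b then p
      else p.set (Nat.max (ufR p a) (ufR p b)) (Nat.min (ufR p a) (ufR p b)) := rfl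
  obtain ⟨hM1, hm1, hM2, hM3, hm2, hm3⟩ := natMinMax (ufR p a) (ufR p b)
  by_cases heq : ufR p a = ufR p b
  · rw [hUn, if_pos heq]
    refine ⟨hinv, rfl, ?_⟩
    intro x
    by_cases hx : ufR p x = ufR p a ∨ ufR p x = ufR p b
    · rw [if_pos hx]
      rcases hx with hx | hx <;> omega
    · rw [if_neg hx]
  · rw [hUn, if_neg heq]
    have hra := (ufR_spec hinv a).1
    have hrb := (ufR_spec hinv b).1
    have hMroot : p.getD (Nat.max (ufR p a) (ufR p b)) (Nat.max (ufR p a) (ufR p b)) =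
        Nat.max (ufR p a) (ufR p b) := by
      rcases hM1 with h | h <;> rw [h]
      · exact hra
      · exact hrb
    have hmroot : p.getD (Nat.min (ufR p a) (ufR p b)) (Nat.min (ufR p a) (ufR p b)) =
        Nat.min (ufR p a) (ufR p b) := by
      rcases hm1 with h | h <;> rw [h]
      · exact hra
      · exact hrb
    have hmM : Nat.min (ufR p a) (ufR p b) < Nat.max (ufR p a) (ufR p b) := by omega
    have hMlen : Nat.max (ufR p a) (ufR p b) < p.length := by
      have h1 := (ufR_spec hinv a).2
      have h2 := (ufR_spec hinv b).2
      omega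
    obtain ⟨hinv', hform⟩ := ufR_set hinv hMroot hmroot hmM hMlen
    refine ⟨hinv', by simp, ?_⟩
    intro x
    rw [hform x]
    by_cases hx : ufR p x = ufR p a ∨ ufR p x = ufR p b
    · rw [if_pos hx]
      by_cases hxM : ufR p x = Nat.max (ufR p a) (ufR p b)
      · rw [if_pos hxM]
      · rw [if_neg hxM]
        rcases hx with hx | hx <;> omega
    · have hxM : ufR p x ≠ Nat.max (ufR p a) (ufR p b) := by
        intro h
        rcases hM1 with hM | hM
        · exact hx (Or.inl (by omega))
        · exact hx (Or.inr (by omega))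
      rw [if_neg hx, if_neg hxM]
-- ---- connectivity relation and the phase-1 invariant ----
def symCl (Q : Nat → Nat → Prop) (x y : Nat) : Prop := Q x y ∨ Q y x

def conn (Q : Nat → Nat → Prop) (x y : Nat) : Prop := Relation.ReflTransGen (symCl Q) x y

theorem conn_symm {Q : Nat → Nat → Prop} {x y : Nat} (h : conn Q x y) : conn Q y x :=
  Relation.ReflTransGen.symmetric (fun _ _ hs => Or.symm hs) h

theorem conn_mono {Q Q' : Nat → Nat → Prop} (hQ : ∀ x y, Q x y → Q' x y) {x y : Nat}
    (h : conn Q x y) : conn Q' x y :=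
  Relation.ReflTransGen.mono (fun _ _ hs => hs.imp (hQ _ _) (hQ _ _)) h

theorem conn_congr {Q Q' : Nat → Nat → Prop} (hQ : ∀ x y, Q x y ↔ Q' x y) (x y : Nat) :
    conn Q x y ↔ conn Q' x y :=
  ⟨conn_mono (fun x y => (hQ x y).1), conn_mono (fun x y => (hQ x y).2)⟩

theorem conn_single {Q : Nat → Nat → Prop} {a b : Nat} (h : Q a b) : conn Q a b :=
  Relation.ReflTransGen.single (Or.inl h)

theorem conn_empty {Q : Nat → Nat → Prop} (hQ : ∀ x y, ¬ Q x y) (x y : Nat) :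
    conn Q x y ↔ x = y := by
  constructor
  · intro h
    induction h with
    | refl => rfl
    | tail h1 h2 ih => rcases h2 with h2 | h2 <;> exact absurd h2 (hQ _ _)
  · rintro rfl; exact Relation.ReflTransGen.refl

theorem conn_merge {Q : Nat → Nat → Prop} {R : Nat → Nat}
    (h : ∀ x y, R x = R y ↔ conn Q x y) {a b : Nat} {R' : Nat → Nat}
    (h' : ∀ x, R' x = if R x = R a ∨ R x = R b then Nat.min (R a) (R b) else R x) :
    ∀ x y, R' x = R' y ↔ conn (fun k l => Q k l ∨ (k = a ∧ l = b)) x y := by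
  have hmono : ∀ x y, conn Q x y → conn (fun k l => Q k l ∨ (k = a ∧ l = b)) x y :=
    fun x y => conn_mono (fun _ _ hq => Or.inl hq)
  have hab : conn (fun k l => Q k l ∨ (k = a ∧ l = b)) a b := conn_single (Or.inr ⟨rfl, rfl⟩)
  obtain ⟨hm1, _, _, _, hm2, hm3⟩ :
      (Nat.max (R a) (R b) = R a ∨ Nat.max (R a) (R b) = R b) ∧
      (Nat.min (R a) (R b) = R a ∨ Nat.min (R a) (R b) = R b) ∧ R a ≤ Nat.max (R a) (R b) ∧
      R b ≤ Nat.max (R a) (R b) ∧ Nat.min (R a) (R b) ≤ R a ∧ Nat.min (R a) (R b) ≤ R b :=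
    natMinMax (R a) (R b)
  have hmm : Nat.min (R a) (R b) = R a ∨ Nat.min (R a) (R b) = R b := by
    rcases Nat.le_total (R a) (R b) with hle | hle
    · exact Or.inl (Nat.min_eq_left hle)
    · exact Or.inr (Nat.min_eq_right hle)
  intro x y
  constructor
  · intro hxy
    rw [h' x, h' y] at hxy
    by_cases hx : R x = R a ∨ R x = R b
    · by_cases hy : R y = R a ∨ R y = R b
      · have hxa : conn (fun k l => Q k l ∨ (k = a ∧ l = b)) x b := by
          rcases hx with hx | hx
          · exact Relation.ReflTransGen.trans (hmono _ _ ((h x a).1 hx)) hab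
          · exact hmono _ _ ((h x b).1 hx)
        have hyb : conn (fun k l => Q k l ∨ (k = a ∧ l = b)) b y := by
          rcases hy with hy | hy
          · exact Relation.ReflTransGen.trans (conn_symm hab) (hmono _ _ ((h a y).1 hy.symm))
          · exact hmono _ _ ((h b y).1 hy.symm)
        exact Relation.ReflTransGen.trans hxa hyb
      · rw [if_pos hx, if_neg hy] at hxy
        exfalso
        rcases hmm with hm | hm <;> rw [hm] at hxy <;> exact hy (by omega)
    · by_cases hy : R y = R a ∨ R y = R b
      · rw [if_neg hx, if_pos hy] at hxy
        exfalso
        rcases hmm with hm | hm <;> rw [hm] at hxy <;> exact hx (by omega)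
      · rw [if_neg hx, if_neg hy] at hxy
        exact hmono _ _ ((h x y).1 hxy)
  · intro hxy
    have hstep : ∀ u v, symCl (fun k l => Q k l ∨ (k = a ∧ l = b)) u v → R' u = R' v := by
      intro u v hs
      have huv : (R u = R v) ∨ ((R u = R a ∨ R u = R b) ∧ (R v = R a ∨ R v = R b)) := by
        rcases hs with hs | hs
        · rcases hs with hq | ⟨rfl, rfl⟩
          · exact Or.inl ((h u v).2 (conn_single hq))
          · exact Or.inr ⟨Or.inl rfl, Or.inr rfl⟩
        · rcases hs with hq | ⟨rfl, rfl⟩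
          · exact Or.inl ((h u v).2 (conn_symm (conn_single hq)))
          · exact Or.inr ⟨Or.inr rfl, Or.inl rfl⟩
      rw [h' u, h' v]
      rcases huv with huv | ⟨hu, hv⟩
      · rw [huv]
      · rw [if_pos hu, if_pos hv]
    induction hxy with
    | refl => rfl
    | tail h1 h2 ih => exact ih.trans (hstep _ _ h2)

-- ---- the edges B's first pass unions, and the invariant it maintains ----
def edgeD (g : List (List Int)) (rows cols : Nat) (k l : Nat) : Prop :=
  valB g cols k ≠ 0 ∧ valB g cols l = valB g cols k ∧
    ((l = k + cols ∧ k / cols + 1 < rows) ∨ (l = k + 1 ∧ k % cols + 1 < cols))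

def edgeU (g : List (List Int)) (rows cols t k l : Nat) : Prop := edgeD g rows cols k l ∧ k < t

def p1Inv (g : List (List Int)) (rows cols t : Nat) (p : List Nat) : Prop :=
  p.length = rows * cols ∧ ufInv p ∧
    ∀ x y, ufR p x = ufR p y ↔ conn (edgeU g rows cols t) x y

theorem getD_range_self (n x : Nat) : (List.range n).getD x x = x := by
  by_cases hx : x < n
  · rw [List.getD_eq_getElem _ _ (by simpa using hx)]
    simp
  · rw [List.getD_eq_default _ _ (by simpa using hx)]

theorem p1Inv_base (g : List (List Int)) (rows cols : Nat) :
    p1Inv g rows cols 0 (List.range (rows * cols)) := by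
  have hroot : ∀ x, ufR (List.range (rows * cols)) x = x :=
    fun x => ufR_of_root (getD_range_self _ x)
  refine ⟨by simp, fun x => le_of_eq (getD_range_self _ x), ?_⟩
  intro x y
  rw [hroot x, hroot y, conn_empty (fun u v huv => by exact absurd huv.2 (Nat.not_lt_zero u))]

theorem cols_pos_of_lt (rows cols t : Nat) (ht : t < rows * cols) : 0 < cols := by
  rcases Nat.eq_zero_or_pos cols with h | h
  · subst h; simp at ht
  · exact h

theorem vert_lt (rows cols t : Nat) (ht : t < rows * cols) (hv : t / cols + 1 < rows) :
    t + cols < rows * cols := by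
  have hc := cols_pos_of_lt rows cols t ht
  have hd := Nat.div_add_mod t cols
  have hm := Nat.mod_lt t hc
  have h1 : t < cols * (t / cols + 1) := by
    have : cols * (t / cols + 1) = cols * (t / cols) + cols := by ring
    omega
  have h2 : cols * (t / cols + 2) ≤ cols * rows := Nat.mul_le_mul_left _ (by omega)
  have h3 : cols * (t / cols + 2) = cols * (t / cols + 1) + cols := by ring
  have h4 : rows * cols = cols * rows := Nat.mul_comm rows cols
  omega

theorem horiz_lt (rows cols t : Nat) (ht : t < rows * cols) (hh : t % cols + 1 < cols) :
    t + 1 < rows * cols := by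
  have hc := cols_pos_of_lt rows cols t ht
  have hd := Nat.div_add_mod t cols
  have hi : t / cols < rows := by
    rcases Nat.lt_or_ge (t / cols) rows with h | h
    · exact h
    · exfalso
      have : cols * rows ≤ cols * (t / cols) := Nat.mul_le_mul_left _ h
      have h4 : rows * cols = cols * rows := Nat.mul_comm rows cols
      omega
  have h1 : cols * (t / cols + 1) ≤ cols * rows := Nat.mul_le_mul_left _ (by omega)
  have h3 : cols * (t / cols + 1) = cols * (t / cols) + cols := by ring
  have h4 : rows * cols = cols * rows := Nat.mul_comm rows cols
  omega

theorem p1Inv_step (g : List (List Int)) (rows cols t : Nat) (p : List Nat)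
    (ht : t < rows * cols) (h : p1Inv g rows cols t p) :
    p1Inv g rows cols (t + 1) (linkCell g rows cols p t) := by
  obtain ⟨hlen, hinv, hchar⟩ := h
  by_cases hv0 : valB g cols t = 0
  · have hL : linkCell g rows cols p t = p := by
      simp only [linkCell]
      rw [if_neg (by simpa using hv0)]
    rw [hL]
    refine ⟨hlen, hinv, ?_⟩
    intro x y
    rw [hchar x y]
    refine conn_congr (fun k l => ?_) x y
    constructor
    · rintro ⟨h1, h2⟩; exact ⟨h1, by omega⟩
    · rintro ⟨h1, h2⟩
      refine ⟨h1, ?_⟩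
      rcases Nat.lt_or_ge k t with hk | hk
      · exact hk
      · exfalso
        have : k = t := by omega
        subst this
        exact h1.1 hv0
  · -- stage 1: the vertical union
    have hs1 : (if t / cols + 1 < rows ∧ valB g cols (t + cols) = valB g cols t then
          ufUnion p t (t + cols) else p).length = rows * cols ∧
        ufInv (if t / cols + 1 < rows ∧ valB g cols (t + cols) = valB g cols t then
          ufUnion p t (t + cols) else p) ∧
        ∀ x y, ufR (if t / cols + 1 < rows ∧ valB g cols (t + cols) = valB g cols t then
            ufUnion p t (t + cols) else p) x =
          ufR (if t / cols + 1 < rows ∧ valB g cols (t + cols) = valB g cols t then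
            ufUnion p t (t + cols) else p) y ↔
          conn (fun k l => edgeU g rows cols t k l ∨
            ((t / cols + 1 < rows ∧ valB g cols (t + cols) = valB g cols t) ∧
              k = t ∧ l = t + cols)) x y := by
      by_cases hc1 : t / cols + 1 < rows ∧ valB g cols (t + cols) = valB g cols t
      · rw [if_pos hc1]
        obtain ⟨hinv', hlen', hform⟩ := ufUnion_spec hinv
          (a := t) (b := t + cols) (by omega) (by have := vert_lt rows cols t ht hc1.1; omega)
        refine ⟨by omega, hinv', ?_⟩
        intro x y
        exact (conn_merge hchar hform x y).trans
          (conn_congr (fun k l => Iff.intro (fun hkl => hkl.imp id (fun hp => ⟨hc1, hp⟩))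
            (fun hkl => hkl.imp id And.right)) x y)
      · rw [if_neg hc1]
        refine ⟨hlen, hinv, ?_⟩
        intro x y
        exact (hchar x y).trans (conn_congr (fun k l => Iff.intro (fun hkl => Or.inl hkl)
          (fun hkl => hkl.elim id (fun hp => absurd hp.1 hc1))) x y)
    set p1 := if t / cols + 1 < rows ∧ valB g cols (t + cols) = valB g cols t then
      ufUnion p t (t + cols) else p with hp1
    obtain ⟨hlen1, hinv1, hchar1⟩ := hs1
    -- stage 2: the horizontal union
    have hL : linkCell g rows cols p t =
        (if t % cols + 1 < cols ∧ valB g cols (t + 1) = valB g cols t then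
          ufUnion p1 t (t + 1) else p1) := by
      simp only [linkCell]
      rw [if_pos (by simpa using hv0)]
    rw [hL]
    have hs2 : ∀ x y, ufR (if t % cols + 1 < cols ∧ valB g cols (t + 1) = valB g cols t then
          ufUnion p1 t (t + 1) else p1) x =
        ufR (if t % cols + 1 < cols ∧ valB g cols (t + 1) = valB g cols t then
          ufUnion p1 t (t + 1) else p1) y ↔
        conn (fun k l => (edgeU g rows cols t k l ∨
            ((t / cols + 1 < rows ∧ valB g cols (t + cols) = valB g cols t) ∧
              k = t ∧ l = t + cols)) ∨
          ((t % cols + 1 < cols ∧ valB g cols (t + 1) = valB g cols t) ∧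
            k = t ∧ l = t + 1)) x y := by
      by_cases hc2 : t % cols + 1 < cols ∧ valB g cols (t + 1) = valB g cols t
      · rw [if_pos hc2]
        obtain ⟨hinv2, hlen2, hform⟩ := ufUnion_spec hinv1
          (a := t) (b := t + 1) (by omega) (by have := horiz_lt rows cols t ht hc2.1; omega)
        intro x y
        exact (conn_merge hchar1 hform x y).trans
          (conn_congr (fun k l => Iff.intro (fun hkl => hkl.imp id (fun hp => ⟨hc2, hp⟩))
            (fun hkl => hkl.imp id And.right)) x y)
      · rw [if_neg hc2]
        intro x y
        exact (hchar1 x y).trans (conn_congr (fun k l => Iff.intro (fun hkl => Or.inl hkl)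
          (fun hkl => hkl.elim id (fun hp => absurd hp.1 hc2))) x y)
    have hlen2 : (if t % cols + 1 < cols ∧ valB g cols (t + 1) = valB g cols t then
        ufUnion p1 t (t + 1) else p1).length = rows * cols := by
      by_cases hc2 : t % cols + 1 < cols ∧ valB g cols (t + 1) = valB g cols t
      · rw [if_pos hc2]
        exact (ufUnion_spec hinv1 (a := t) (b := t + 1) (by omega)
          (by have := horiz_lt rows cols t ht hc2.1; omega)).2.1.trans hlen1
      · rw [if_neg hc2]; exact hlen1
    have hinv2 : ufInv (if t % cols + 1 < cols ∧ valB g cols (t + 1) = valB g cols t then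
        ufUnion p1 t (t + 1) else p1) := by
      by_cases hc2 : t % cols + 1 < cols ∧ valB g cols (t + 1) = valB g cols t
      · rw [if_pos hc2]
        exact (ufUnion_spec hinv1 (a := t) (b := t + 1) (by omega)
          (by have := horiz_lt rows cols t ht hc2.1; omega)).1
      · rw [if_neg hc2]; exact hinv1
    refine ⟨hlen2, hinv2, ?_⟩
    intro x y
    rw [hs2 x y]
    refine conn_congr (fun k l => ?_) x y
    constructor
    · rintro ((⟨h1, h2⟩ | ⟨⟨hc1, hval⟩, rfl, rfl⟩) | ⟨⟨hc2, hval⟩, rfl, rfl⟩)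
      · exact ⟨h1, by omega⟩
      · exact ⟨⟨hv0, hval, Or.inl ⟨rfl, hc1⟩⟩, by omega⟩
      · exact ⟨⟨hv0, hval, Or.inr ⟨rfl, hc2⟩⟩, by omega⟩
    · rintro ⟨⟨h1, h2, h3 | h3⟩, hk⟩
      · rcases Nat.lt_or_ge k t with hkt | hkt
        · exact Or.inl (Or.inl ⟨⟨h1, h2, Or.inl h3⟩, hkt⟩)
        · have hkt' : k = t := by omega
          subst hkt'
          exact Or.inl (Or.inr ⟨⟨h3.2, h3.1 ▸ h2⟩, rfl, h3.1⟩)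
      · rcases Nat.lt_or_ge k t with hkt | hkt
        · exact Or.inl (Or.inl ⟨⟨h1, h2, Or.inr h3⟩, hkt⟩)
        · have hkt' : k = t := by omega
          subst hkt'
          exact Or.inr ⟨⟨h3.2, h3.1 ▸ h2⟩, rfl, h3.1⟩

theorem p1Inv_fold (g : List (List Int)) (rows cols : Nat) :
    ∀ t, t ≤ rows * cols →
      p1Inv g rows cols t ((List.range t).foldl (linkCell g rows cols) (List.range (rows * cols))) := by
  intro t
  induction t with
  | zero => intro _; exact p1Inv_base g rows cols
  | succ t ih =>
    intro ht
    rw [List.range_succ, List.foldl_append, List.foldl_cons, List.foldl_nil]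
    exact p1Inv_step g rows cols t _ (by omega) (ih (by omega))
-- ---- basic geometry ----
def inB (rows cols : Nat) (p : Nat × Nat) : Prop := p.1 < rows ∧ p.2 < cols

def AdjC (g : List (List Int)) (rows cols : Nat) (color : Int) (p q : Nat × Nat) : Prop :=
  q ∈ candsA rows cols p.1 p.2 ∧ cellA g q.1 q.2 = color

def ReachC (g : List (List Int)) (rows cols : Nat) (color : Int) (p q : Nat × Nat) : Prop :=
  Relation.ReflTransGen (AdjC g rows cols color) p q

def lexLt (a b : Nat × Nat) : Prop := a.1 < b.1 ∨ (a.1 = b.1 ∧ a.2 < b.2)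

def allIdx (rows cols : Nat) : List (Nat × Nat) :=
  (List.range rows).flatMap (fun i => (List.range cols).map (fun j => (i, j)))

theorem mem_allIdx (rows cols : Nat) (p : Nat × Nat) :
    p ∈ allIdx rows cols ↔ inB rows cols p := by
  cases p with
  | mk a b =>
    simp only [allIdx, inB, List.mem_flatMap, List.mem_map, List.mem_range, Prod.mk.injEq]
    constructor
    · rintro ⟨i, hi, j, hj, h1, h2⟩; subst h1; subst h2; exact ⟨hi, hj⟩
    · rintro ⟨h1, h2⟩; exact ⟨a, h1, b, h2, rfl, rfl⟩

theorem length_allIdx (rows cols : Nat) : (allIdx rows cols).length = rows * cols := by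
  simp [allIdx, List.length_flatMap]

theorem pairwise_allIdx (rows cols : Nat) : (allIdx rows cols).Pairwise lexLt := by
  rw [allIdx, List.pairwise_flatMap]
  constructor
  · intro i _
    rw [List.pairwise_map]
    exact (List.pairwise_lt_range).imp (fun h => Or.inr ⟨rfl, h⟩)
  · apply (List.pairwise_lt_range).imp
    intro i₁ i₂ h x hx y hy
    simp only [List.mem_map, List.mem_range] at hx hy
    obtain ⟨j₁, _, rfl⟩ := hx
    obtain ⟨j₂, _, rfl⟩ := hy
    exact Or.inl h

theorem nodup_allIdx (rows cols : Nat) : (allIdx rows cols).Nodup := by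
  apply (pairwise_allIdx rows cols).imp
  intro a b h hab
  subst hab
  simp [lexLt] at h

theorem nodup_len_le (rows cols : Nat) (l : List (Nat × Nat)) (hn : l.Nodup)
    (hb : ∀ x ∈ l, inB rows cols x) : l.length ≤ rows * cols := by
  have hsub : l ⊆ allIdx rows cols := fun x hx => (mem_allIdx rows cols x).2 (hb x hx)
  have := (hn.subperm hsub).length_le
  rwa [length_allIdx] at this

theorem candsA_inB {rows cols r c : Nat} (hr : r < rows) (hc : c < cols) {q : Nat × Nat}
    (hq : q ∈ candsA rows cols r c) : inB rows cols q := by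
  obtain ⟨a, b⟩ := q
  simp only [candsA, List.mem_append, List.mem_ite_nil_right, List.mem_singleton,
    Prod.mk.injEq] at hq
  simp only [inB]
  omega

theorem candsA_symm {rows cols r c : Nat} (hr : r < rows) (hc : c < cols) {q : Nat × Nat}
    (hq : q ∈ candsA rows cols r c) : (r, c) ∈ candsA rows cols q.1 q.2 := by
  obtain ⟨a, b⟩ := q
  simp only [candsA, List.mem_append, List.mem_ite_nil_right, List.mem_singleton,
    Prod.mk.injEq] at hq ⊢
  omega

theorem reach_inB {g : List (List Int)} {rows cols : Nat} {color : Int} {p q : Nat × Nat}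
    (hp : inB rows cols p) (h : ReachC g rows cols color p q) : inB rows cols q := by
  induction h with
  | refl => exact hp
  | tail h1 h2 ih => exact candsA_inB ih.1 ih.2 h2.1

theorem reach_color {g : List (List Int)} {rows cols : Nat} {color : Int} {p q : Nat × Nat}
    (h : ReachC g rows cols color p q) : q = p ∨ cellA g q.1 q.2 = color := by
  induction h with
  | refl => exact Or.inl rfl
  | tail h1 h2 ih => exact Or.inr h2.2

theorem reach_symm {g : List (List Int)} {rows cols : Nat} {color : Int} {p q : Nat × Nat}
    (hp : inB rows cols p) (hcol : cellA g p.1 p.2 = color)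
    (h : ReachC g rows cols color p q) : ReachC g rows cols color q p := by
  induction h with
  | refl => exact Relation.ReflTransGen.refl
  | @tail b c h1 h2 ih =>
    have hb : inB rows cols b := reach_inB hp h1
    have hcb : cellA g b.1 b.2 = color := by
      rcases reach_color h1 with h | h
      · rw [h]; exact hcol
      · exact h
    have hmem : (b.1, b.2) ∈ candsA rows cols c.1 c.2 := candsA_symm hb.1 hb.2 h2.1
    exact Relation.ReflTransGen.head ⟨by simpa using hmem, hcb⟩ ih

-- ---- min/max over lists, by membership ----
theorem foldl_min_spec : ∀ (xs : List Nat) (a : Nat),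
    (xs.foldl Nat.min a = a ∨ xs.foldl Nat.min a ∈ xs) ∧ xs.foldl Nat.min a ≤ a ∧
      ∀ x ∈ xs, xs.foldl Nat.min a ≤ x := by
  intro xs
  induction xs with
  | nil => intro a; simp
  | cons x xs ih =>
    intro a
    simp only [List.foldl_cons]
    obtain ⟨h1, h2, h3⟩ := ih (Nat.min a x)
    refine ⟨?_, ?_, ?_⟩
    · rcases h1 with h | h
      · have hch : Nat.min a x = a ∨ Nat.min a x = x := by
          rcases Nat.le_total a x with h' | h'
          · exact Or.inl (min_eq_left h')
          · exact Or.inr (min_eq_right h')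
        rcases hch with h' | h' <;> rw [h, h']
        · exact Or.inl rfl
        · exact Or.inr (List.mem_cons_self)
      · exact Or.inr (List.mem_cons_of_mem _ h)
    · exact le_trans h2 (Nat.min_le_left a x)
    · intro y hy
      rcases List.mem_cons.1 hy with rfl | hy
      · exact le_trans h2 (Nat.min_le_right a y)
      · exact h3 y hy

theorem foldl_max_spec : ∀ (xs : List Nat) (a : Nat),
    (xs.foldl Nat.max a = a ∨ xs.foldl Nat.max a ∈ xs) ∧ a ≤ xs.foldl Nat.max a ∧
      ∀ x ∈ xs, x ≤ xs.foldl Nat.max a := by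
  intro xs
  induction xs with
  | nil => intro a; simp
  | cons x xs ih =>
    intro a
    simp only [List.foldl_cons]
    obtain ⟨h1, h2, h3⟩ := ih (Nat.max a x)
    refine ⟨?_, ?_, ?_⟩
    · rcases h1 with h | h
      · have hch : Nat.max a x = a ∨ Nat.max a x = x := by
          rcases Nat.le_total a x with h' | h'
          · exact Or.inr (max_eq_right h')
          · exact Or.inl (max_eq_left h')
        rcases hch with h' | h' <;> rw [h, h']
        · exact Or.inl rfl
        · exact Or.inr (List.mem_cons_self)
      · exact Or.inr (List.mem_cons_of_mem _ h)
    · exact le_trans (Nat.le_max_left a x) h2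
    · intro y hy
      rcases List.mem_cons.1 hy with rfl | hy
      · exact le_trans (Nat.le_max_right a y) h2
      · exact h3 y hy

theorem minN_spec (l : List Nat) (h : l ≠ []) : minN l ∈ l ∧ ∀ x ∈ l, minN l ≤ x := by
  match l with
  | [] => exact absurd rfl h
  | x :: xs =>
    obtain ⟨h1, h2, h3⟩ := foldl_min_spec xs x
    refine ⟨?_, ?_⟩
    · show xs.foldl Nat.min x ∈ x :: xs
      rcases h1 with h' | h'
      · rw [h']; exact List.mem_cons_self
      · exact List.mem_cons_of_mem _ h'
    · intro y hy
      rcases List.mem_cons.1 hy with rfl | hy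
      · exact h2
      · exact h3 y hy

theorem maxN_spec (l : List Nat) (h : l ≠ []) : maxN l ∈ l ∧ ∀ x ∈ l, x ≤ maxN l := by
  match l with
  | [] => exact absurd rfl h
  | x :: xs =>
    obtain ⟨h1, h2, h3⟩ := foldl_max_spec xs x
    refine ⟨?_, ?_⟩
    · show xs.foldl Nat.max x ∈ x :: xs
      rcases h1 with h' | h'
      · rw [h']; exact List.mem_cons_self
      · exact List.mem_cons_of_mem _ h'
    · intro y hy
      rcases List.mem_cons.1 hy with rfl | hy
      · exact h2
      · exact h3 y hy

-- B's min(rs): the first extremal element of a nonempty Nat list, via PySem.List.min?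
theorem pyMin_eq_minN {l l' : List Nat} (hmem : ∀ x, x ∈ l ↔ x ∈ l') (hl : l ≠ []) (hl' : l' ≠ []) :
    (PySem.List.min? l (fun x => x)).getD 0 = minN l' := by
  obtain ⟨m, hm⟩ : ∃ m, PySem.List.min? l (fun x => x) = some m := by
    cases hopt : PySem.List.min? l (fun x => x) with
    | none => exact absurd ((PySem.List.min?_eq_none_iff l _).1 hopt) hl
    | some m => exact ⟨m, rfl⟩
  rw [hm]
  obtain ⟨hm1, hm2⟩ := minN_spec l' hl'
  exact le_antisymm (PySem.List.min?_isMin hm _ ((hmem _).2 hm1))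
    (hm2 _ ((hmem _).1 (PySem.List.min?_mem hm)))

theorem pyMax_eq_maxN {l l' : List Nat} (hmem : ∀ x, x ∈ l ↔ x ∈ l') (hl : l ≠ []) (hl' : l' ≠ []) :
    (PySem.List.max? l (fun x => x)).getD 0 = maxN l' := by
  obtain ⟨m, hm⟩ : ∃ m, PySem.List.max? l (fun x => x) = some m := by
    cases hopt : PySem.List.max? l (fun x => x) with
    | none => exact absurd ((PySem.List.max?_eq_none_iff l _).1 hopt) hl
    | some m => exact ⟨m, rfl⟩
  rw [hm]
  obtain ⟨hm1, hm2⟩ := maxN_spec l' hl'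
  exact le_antisymm (hm2 _ ((hmem _).1 (PySem.List.max?_mem hm)))
    (PySem.List.max?_isMax hm _ ((hmem _).2 hm1))

-- ---- A's bfs ----
theorem bfsPush_fold {g : List (List Int)} {color : Int} :
    ∀ (l : List (Nat × Nat)) (vis : PySem.Set (Nat × Nat)) (queue comp : List (Nat × Nat)),
    ∃ new : List (Nat × Nat),
      l.foldl (bfsPushA g color) (vis, queue, comp) = (vis ++ new, queue ++ new, comp ++ new) ∧
      new.Nodup ∧ (∀ n ∈ new, n ∈ l ∧ cellA g n.1 n.2 = color ∧ n ∉ vis) ∧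
      (∀ n ∈ l, cellA g n.1 n.2 = color → n ∈ vis ++ new) := by
  intro l
  induction l with
  | nil => intro vis queue comp; exact ⟨[], by simp, by simp, by simp, by simp⟩
  | cons n l ih =>
    intro vis queue comp
    simp only [List.foldl_cons]
    by_cases hc : n ∉ vis ∧ cellA g n.1 n.2 = color
    · rw [show bfsPushA g color (vis, queue, comp) n =
          (PySem.Set.add vis n, queue ++ [n], comp ++ [n]) from if_pos hc]
      rw [PySem.Set.add_of_not_mem hc.1]
      obtain ⟨new, heq, hnd, hmem, hcov⟩ := ih (vis ++ [n]) (queue ++ [n]) (comp ++ [n])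
      refine ⟨n :: new, ?_, ?_, ?_, ?_⟩
      · rw [heq]; simp
      · refine List.nodup_cons.2 ⟨?_, hnd⟩
        intro hn
        exact (hmem n hn).2.2 (by simp)
      · intro m hm
        rcases List.mem_cons.1 hm with rfl | hm
        · exact ⟨List.mem_cons_self, hc.2, hc.1⟩
        · obtain ⟨h1, h2, h3⟩ := hmem m hm
          refine ⟨List.mem_cons_of_mem _ h1, h2, ?_⟩
          intro hmv; exact h3 (by simp [hmv])
      · intro m hm hcol
        rcases List.mem_cons.1 hm with rfl | hm
        · simp
        · have := hcov m hm hcol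
          simpa using this
    · rw [show bfsPushA g color (vis, queue, comp) n = (vis, queue, comp) from if_neg hc]
      obtain ⟨new, heq, hnd, hmem, hcov⟩ := ih vis queue comp
      refine ⟨new, heq, hnd, ?_, ?_⟩
      · intro m hm
        obtain ⟨h1, h2, h3⟩ := hmem m hm
        exact ⟨List.mem_cons_of_mem _ h1, h2, h3⟩
      · intro m hm hcol
        rcases List.mem_cons.1 hm with rfl | hm
        · have hmv : m ∈ vis := by
            by_contra hnv
            exact hc ⟨hnv, hcol⟩
          exact List.mem_append_left _ hmv
        · exact hcov m hm hcol

theorem bfs_closure {g : List (List Int)} {rows cols : Nat} {color : Int} {p : Nat × Nat}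
    {V₀ vis : PySem.Set (Nat × Nat)} {comp : List (Nat × Nat)}
    (hdis : ∀ x ∈ V₀, ¬ ReachC g rows cols color p x)
    (h1 : ∀ x ∈ comp, ReachC g rows cols color p x)
    (h3 : ∀ x, x ∈ vis ↔ x ∈ V₀ ∨ x ∈ comp)
    (h4 : ∀ x ∈ comp, ∀ q, AdjC g rows cols color x q → q ∈ vis)
    (h6 : p ∈ comp) :
    ∀ x, x ∈ comp ↔ ReachC g rows cols color p x := by
  intro x
  refine ⟨h1 x, ?_⟩
  intro hr
  induction hr with
  | refl => exact h6
  | @tail b c hb hAdj ihb =>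
    have hcv := h4 b ihb c hAdj
    rcases (h3 c).1 hcv with hV | hC
    · exact absurd (Relation.ReflTransGen.tail hb hAdj) (hdis c hV)
    · exact hC

theorem bfsLoopA_spec {g : List (List Int)} {rows cols : Nat} {color : Int} {p : Nat × Nat}
    (hp : inB rows cols p) (hcol : cellA g p.1 p.2 = color)
    {V₀ : PySem.Set (Nat × Nat)} (hdis : ∀ x ∈ V₀, ¬ ReachC g rows cols color p x) :
    ∀ (fuel : Nat) (queue : List (Nat × Nat)) (vis : PySem.Set (Nat × Nat)) (comp : List (Nat × Nat)),
    (∀ x ∈ comp, ReachC g rows cols color p x) →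
    (∀ x ∈ queue, x ∈ comp) →
    (∀ x, x ∈ vis ↔ x ∈ V₀ ∨ x ∈ comp) →
    (∀ x ∈ comp, x ∉ queue → ∀ q, AdjC g rows cols color x q → q ∈ vis) →
    comp.Nodup → p ∈ comp →
    queue.length + rows * cols ≤ fuel + comp.length →
    (∀ x, x ∈ (bfsLoopA g rows cols color fuel queue vis comp).2 ↔ ReachC g rows cols color p x) ∧
    (bfsLoopA g rows cols color fuel queue vis comp).2.Nodup ∧
    (∀ x, x ∈ (bfsLoopA g rows cols color fuel queue vis comp).1 ↔
      x ∈ V₀ ∨ ReachC g rows cols color p x) := by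
  intro fuel
  induction fuel with
  | zero =>
    intro queue vis comp h1 h2 h3 h4 h5 h6 h8
    match queue, h2, h4, h8 with
    | [], h2, h4, h8 =>
      have hcl := bfs_closure hdis h1 h3 (fun x hx => h4 x hx (by simp)) h6
      exact ⟨hcl, h5, fun x => (h3 x).trans (or_congr Iff.rfl (hcl x))⟩
    | q :: qs, h2, h4, h8 =>
      exfalso
      have hle : comp.length ≤ rows * cols :=
        nodup_len_le rows cols comp h5 (fun x hx => reach_inB hp (h1 x hx))
      simp at h8
      omega
  | succ fuel ih =>
    intro queue vis comp h1 h2 h3 h4 h5 h6 h8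
    match queue, h2, h4, h8 with
    | [], h2, h4, h8 =>
      have hcl := bfs_closure hdis h1 h3 (fun x hx => h4 x hx (by simp)) h6
      exact ⟨hcl, h5, fun x => (h3 x).trans (or_congr Iff.rfl (hcl x))⟩
    | q :: qs, h2, h4, h8 =>
      have hqcomp : q ∈ comp := h2 q List.mem_cons_self
      have hRq : ReachC g rows cols color p q := h1 q hqcomp
      have hqcol : cellA g q.1 q.2 = color := by
        rcases reach_color hRq with h | h
        · rw [h]; exact hcol
        · exact h
      obtain ⟨new, heq, hndnew, hmemnew, hcov⟩ :=
        bfsPush_fold (g := g) (color := color) (candsA rows cols q.1 q.2) vis qs comp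
      have hstep : bfsLoopA g rows cols color (fuel + 1) (q :: qs) vis comp =
          bfsLoopA g rows cols color fuel (qs ++ new) (vis ++ new) (comp ++ new) := by
        show bfsLoopA g rows cols color fuel
            ((candsA rows cols q.1 q.2).foldl (bfsPushA g color) (vis, qs, comp)).2.1
            ((candsA rows cols q.1 q.2).foldl (bfsPushA g color) (vis, qs, comp)).1
            ((candsA rows cols q.1 q.2).foldl (bfsPushA g color) (vis, qs, comp)).2.2 = _
        rw [heq]
      rw [hstep]
      apply ih (qs ++ new) (vis ++ new) (comp ++ new)
      · intro x hx
        rcases List.mem_append.1 hx with hx | hx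
        · exact h1 x hx
        · obtain ⟨hc, hcell, -⟩ := hmemnew x hx
          exact Relation.ReflTransGen.tail hRq ⟨hc, hcell⟩
      · intro x hx
        rcases List.mem_append.1 hx with hx | hx
        · exact List.mem_append_left _ (h2 x (List.mem_cons_of_mem _ hx))
        · exact List.mem_append_right _ hx
      · intro x
        rw [List.mem_append, List.mem_append, h3 x]
        tauto
      · intro x hx hnq t hadj
        rcases List.mem_append.1 hx with hxc | hxn
        · by_cases hxq : x = q
          · subst hxq
            exact hcov t hadj.1 hadj.2
          · have hxqs : x ∉ qs := fun h => hnq (List.mem_append_left _ h)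
            have hxqueue : x ∉ q :: qs := by simp [hxq, hxqs]
            exact List.mem_append_left _ (h4 x hxc hxqueue t hadj)
        · exact absurd (List.mem_append_right _ hxn) hnq
      · refine h5.append hndnew ?_
        intro a ha han
        exact (hmemnew a han).2.2 ((h3 a).2 (Or.inr ha))
      · exact List.mem_append_left _ h6
      · simp only [List.length_append]
        simp only [List.length_cons] at h8
        omega

-- ---- rendering ----
def render (g : List (List Int)) (S : List (Nat × Nat)) : List (List Int) :=
  g.mapIdx (fun i row => row.mapIdx (fun j v => if (i, j) ∈ S then 0 else v))

theorem render_congr {g : List (List Int)} {S T : List (Nat × Nat)}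
    (h : ∀ p, p ∈ S ↔ p ∈ T) : render g S = render g T := by
  unfold render
  apply List.ext_getElem (by simp)
  intro i hi1 hi2
  simp only [List.getElem_mapIdx]
  apply List.ext_getElem (by simp)
  intro j hj1 hj2
  simp only [List.getElem_mapIdx]
  exact if_congr (h (i, j)) rfl rfl

theorem render_empty (g : List (List Int)) : render g [] = g := by
  unfold render
  apply List.ext_getElem (by simp)
  intro i hi1 hi2
  simp only [List.getElem_mapIdx]
  apply List.ext_getElem (by simp)
  intro j hj1 hj2
  simp

theorem render_clearCell (g : List (List Int)) (S : List (Nat × Nat)) (r c : Nat) :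
    (render g S).modify r (fun row => row.set c 0) = render g (S ++ [(r, c)]) := by
  apply List.ext_getElem (by simp [render])
  intro i hi1 hi2
  rw [List.getElem_modify]
  by_cases hri : r = i
  · rw [if_pos hri]
    subst hri
    simp only [render, List.getElem_mapIdx]
    apply List.ext_getElem (by simp)
    intro j hj1 hj2
    rw [List.getElem_set]
    simp only [List.getElem_mapIdx]
    by_cases hcj : c = j
    · rw [if_pos hcj]
      subst hcj
      simp
    · rw [if_neg hcj]
      have hmem : ((r, j) ∈ S ++ [(r, c)]) ↔ (r, j) ∈ S := by
        simp only [List.mem_append, List.mem_singleton, Prod.mk.injEq]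
        constructor
        · rintro (h | ⟨-, rfl⟩)
          · exact h
          · exact absurd rfl hcj
        · exact Or.inl
      rw [if_congr hmem rfl rfl]
  · rw [if_neg hri]
    simp only [render, List.getElem_mapIdx]
    apply List.ext_getElem (by simp)
    intro j hj1 hj2
    simp only [List.getElem_mapIdx]
    have hmem : ((i, j) ∈ S ++ [(r, c)]) ↔ (i, j) ∈ S := by
      simp only [List.mem_append, List.mem_singleton, Prod.mk.injEq]
      constructor
      · rintro (h | ⟨rfl, -⟩)
        · exact h
        · exact absurd rfl hri
      · exact Or.inl
    rw [if_congr hmem rfl rfl]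

theorem render_clearRow (g : List (List Int)) (ir : Nat) :
    ∀ (l : List Nat) (S : List (Nat × Nat)),
    l.foldl (fun o ic => o.modify ir (fun row => row.set ic 0)) (render g S) =
      render g (S ++ l.map (fun ic => (ir, ic))) := by
  intro l
  induction l with
  | nil => intro S; simp
  | cons ic l ih =>
    intro S
    simp only [List.foldl_cons]
    rw [render_clearCell, ih, List.append_assoc]
    rfl

theorem render_clearRect (g : List (List Int)) (S : List (Nat × Nat)) (minR maxR minC maxC : Nat) :
    clearRectA (render g S) minR maxR minC maxC = render g (S ++ interiorCells minR maxR minC maxC) := by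
  unfold clearRectA interiorCells
  generalize (List.range' (minR + 1) (maxR - minR - 1)) = l
  induction l generalizing S with
  | nil => simp
  | cons ir l ih =>
    simp only [List.foldl_cons, List.flatMap_cons]
    rw [show clearRowA (render g S) ir minC maxC =
        render g (S ++ (List.range' (minC + 1) (maxC - minC - 1)).map (fun ic => (ir, ic))) from
      render_clearRow g ir _ S]
    rw [ih, List.append_assoc]

theorem foldl_flatMap' {α β σ : Type} :
    ∀ (l : List α) (h : α → List β) (f : σ → β → σ) (init : σ),
    (l.flatMap h).foldl f init = l.foldl (fun st a => (h a).foldl f st) init := by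
  intro l
  induction l with
  | nil => intro h f init; rfl
  | cons a l ih =>
    intro h f init
    simp only [List.flatMap_cons, List.foldl_append, List.foldl_cons]
    exact ih h f _

-- ---- A's visited-set invariant ----
theorem visA_absorb {g : List (List Int)} {rows cols : Nat} {P : List (Nat × Nat)}
    {visA : PySem.Set (Nat × Nat)}
    (hvis : ∀ x, x ∈ visA ↔ ∃ q' ∈ P, cellA g q'.1 q'.2 ≠ 0 ∧
      ReachC g rows cols (cellA g q'.1 q'.2) q' x)
    {q x : Nat × Nat} (hq : inB rows cols q)
    (hx : x ∈ visA) (hR : ReachC g rows cols (cellA g q.1 q.2) q x) : q ∈ visA := by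
  obtain ⟨q', hq'P, hq'0, hq'R⟩ := (hvis x).1 hx
  by_cases hxq : x = q
  · subst hxq
    exact (hvis x).2 ⟨q', hq'P, hq'0, hq'R⟩
  · have hcx : cellA g x.1 x.2 = cellA g q.1 q.2 := by
      rcases reach_color hR with h | h
      · exact absurd h hxq
      · exact h
    have hc' : cellA g q'.1 q'.2 = cellA g q.1 q.2 := by
      by_cases hxq' : x = q'
      · subst hxq'; exact hcx
      · rcases reach_color hq'R with h | h
        · exact absurd h hxq'
        · rw [← h]; exact hcx
    have hsym : ReachC g rows cols (cellA g q.1 q.2) x q := reach_symm hq rfl hR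
    refine (hvis q).2 ⟨q', hq'P, hq'0, ?_⟩
    rw [hc']
    exact Relation.ReflTransGen.trans (hc' ▸ hq'R) hsym

theorem visA_forward {g : List (List Int)} {rows cols : Nat} {P : List (Nat × Nat)}
    {visA : PySem.Set (Nat × Nat)}
    (hvis : ∀ x, x ∈ visA ↔ ∃ q' ∈ P, cellA g q'.1 q'.2 ≠ 0 ∧
      ReachC g rows cols (cellA g q'.1 q'.2) q' x)
    {q x : Nat × Nat} (hqv : q ∈ visA)
    (hR : ReachC g rows cols (cellA g q.1 q.2) q x) : x ∈ visA := by
  obtain ⟨q'', hP, h0, hRq⟩ := (hvis q).1 hqv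
  have hc : cellA g q''.1 q''.2 = cellA g q.1 q.2 := by
    by_cases hqq : q = q''
    · subst hqq; rfl
    · rcases reach_color hRq with h | h
      · exact absurd h hqq
      · exact h.symm
  refine (hvis x).2 ⟨q'', hP, h0, Relation.ReflTransGen.trans hRq ?_⟩
  exact hc.symm ▸ hR

theorem nested_eq_flat {σ : Type} (f : σ → Nat → Nat → σ) (rows cols : Nat) (init : σ) :
    (List.range rows).foldl (fun st i => (List.range cols).foldl (fun st j => f st i j) st) init =
    (allIdx rows cols).foldl (fun st p => f st p.1 p.2) init := by
  rw [allIdx, foldl_flatMap']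
  simp only [List.foldl_map]
-- ---- flattened indices vs. coordinate pairs ----
def toPair (cols k : Nat) : Nat × Nat := (k / cols, k % cols)

def toIdx (cols : Nat) (p : Nat × Nat) : Nat := p.1 * cols + p.2

theorem val_cell (g : List (List Int)) (cols k : Nat) :
    valB g cols k = cellA g (toPair cols k).1 (toPair cols k).2 := rfl

theorem toIdx_toPair {cols : Nat} (_hc : 0 < cols) (k : Nat) : toIdx cols (toPair cols k) = k := by
  show k / cols * cols + k % cols = k
  have := Nat.div_add_mod k cols
  have h2 : k / cols * cols = cols * (k / cols) := Nat.mul_comm _ _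
  omega

theorem toPair_toIdx {cols : Nat} {p : Nat × Nat} (hj : p.2 < cols) :
    toPair cols (toIdx cols p) = p := by
  obtain ⟨i, j⟩ := p
  have hc : 0 < cols := by omega
  show ((i * cols + j) / cols, (i * cols + j) % cols) = (i, j)
  have h1 : i * cols + j = cols * i + j := by ring
  rw [h1, Prod.mk.injEq]
  constructor
  · rw [Nat.mul_add_div hc, Nat.div_eq_of_lt hj]
    rfl
  · rw [Nat.mul_add_mod, Nat.mod_eq_of_lt hj]


theorem toIdx_lt {rows cols : Nat} {p : Nat × Nat} (h : inB rows cols p) :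
    toIdx cols p < rows * cols := by
  obtain ⟨i, j⟩ := p
  obtain ⟨h1, h2⟩ := h
  show i * cols + j < rows * cols
  have h3 : (i + 1) * cols ≤ rows * cols := Nat.mul_le_mul_right _ (by omega)
  have h4 : (i + 1) * cols = i * cols + cols := by ring
  omega

theorem toPair_inB {rows cols k : Nat} (hk : k < rows * cols) :
    inB rows cols (toPair cols k) := by
  have hc : 0 < cols := cols_pos_of_lt rows cols k hk
  constructor
  · show k / cols < rows
    rw [Nat.div_lt_iff_lt_mul hc]
    have : rows * cols = cols * rows := Nat.mul_comm _ _
    omega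
  · exact Nat.mod_lt _ hc

theorem toIdx_lt_of_lex {rows cols : Nat} {p q : Nat × Nat} (hp : inB rows cols p)
    (hq : inB rows cols q) (h : lexLt p q) : toIdx cols p < toIdx cols q := by
  obtain ⟨a, b⟩ := p
  obtain ⟨i, j⟩ := q
  show a * cols + b < i * cols + j
  rcases h with h | ⟨h1, h2⟩
  · have h3 : (a + 1) * cols ≤ i * cols := Nat.mul_le_mul_right _ (by omega)
    have h4 : (a + 1) * cols = a * cols + cols := by ring
    have h5 : b < cols := hp.2
    omega
  · simp only at h1
    subst h1
    omega

theorem lex_of_toIdx_lt {rows cols : Nat} {p q : Nat × Nat} (hp : inB rows cols p)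
    (hq : inB rows cols q) (h : toIdx cols p < toIdx cols q) : lexLt p q := by
  rcases lt_trichotomy p.1 q.1 with hc | hc | hc
  · exact Or.inl hc
  · obtain ⟨a, b⟩ := p
    obtain ⟨i, j⟩ := q
    simp only at hc
    subst hc
    have : b < j := by
      have := h
      simp only [toIdx] at this
      omega
    exact Or.inr ⟨rfl, this⟩
  · exfalso
    exact absurd (toIdx_lt_of_lex hq hp (Or.inl hc)) (by omega)

theorem mem_candsA_iff (rows cols i j a b : Nat) :
    (a, b) ∈ candsA rows cols i j ↔
      ((1 ≤ i ∧ a = i - 1 ∧ b = j) ∨ (i + 1 < rows ∧ a = i + 1 ∧ b = j) ∨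
       (1 ≤ j ∧ a = i ∧ b = j - 1) ∨ (j + 1 < cols ∧ a = i ∧ b = j + 1)) := by
  simp only [candsA, List.mem_append, List.mem_ite_nil_right, List.mem_singleton, Prod.mk.injEq]
  tauto

theorem mem_candsA_down (rows cols i j : Nat) (h : i + 1 < rows) :
    (i + 1, j) ∈ candsA rows cols i j := by
  rw [mem_candsA_iff]; omega

theorem mem_candsA_up (rows cols i j : Nat) (h : 1 ≤ i) :
    (i - 1, j) ∈ candsA rows cols i j := by
  rw [mem_candsA_iff]; omega

theorem mem_candsA_right (rows cols i j : Nat) (h : j + 1 < cols) :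
    (i, j + 1) ∈ candsA rows cols i j := by
  rw [mem_candsA_iff]; omega

theorem mem_candsA_left (rows cols i j : Nat) (h : 1 ≤ j) :
    (i, j - 1) ∈ candsA rows cols i j := by
  rw [mem_candsA_iff]; omega

-- an edge of B's first pass is one grid adjacency, in both directions
theorem edge_adj {g : List (List Int)} {rows cols k l : Nat} (he : edgeD g rows cols k l)
    (hk : k < rows * cols) :
    l < rows * cols ∧
    AdjC g rows cols (valB g cols k) (toPair cols k) (toPair cols l) ∧
    AdjC g rows cols (valB g cols k) (toPair cols l) (toPair cols k) := by
  have hc : 0 < cols := cols_pos_of_lt rows cols k hk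
  obtain ⟨hv0, hval, hdir⟩ := he
  have hm := Nat.mod_lt k hc
  rcases hdir with ⟨rfl, hb⟩ | ⟨rfl, hb⟩
  · have hl : k + cols < rows * cols := vert_lt rows cols k hk hb
    have hp : toPair cols (k + cols) = (k / cols + 1, k % cols) := by
      show ((k + cols) / cols, (k + cols) % cols) = _
      rw [Nat.add_div_right _ hc, Nat.add_mod_right]
    refine ⟨hl, ⟨?_, ?_⟩, ⟨?_, ?_⟩⟩
    · rw [hp]
      show (k / cols + 1, k % cols) ∈ candsA rows cols (k / cols) (k % cols)
      exact mem_candsA_down rows cols _ _ hb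
    · rw [← val_cell, hval]
    · rw [hp]
      show (k / cols, k % cols) ∈ candsA rows cols (k / cols + 1) (k % cols)
      simpa using mem_candsA_up rows cols (k / cols + 1) (k % cols) (Nat.le_add_left 1 _)
    · rw [← val_cell]
  · have hl : k + 1 < rows * cols := horiz_lt rows cols k hk hb
    have hp : toPair cols (k + 1) = (k / cols, k % cols + 1) := by
      show ((k + 1) / cols, (k + 1) % cols) = _
      have hd := Nat.div_add_mod k cols
      have h1 : k + 1 = cols * (k / cols) + (k % cols + 1) := by omega
      rw [h1, Nat.mul_add_div hc, Nat.mul_add_mod, Nat.div_eq_of_lt hb, Nat.mod_eq_of_lt hb]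
      simp
    refine ⟨hl, ⟨?_, ?_⟩, ⟨?_, ?_⟩⟩
    · rw [hp]
      show (k / cols, k % cols + 1) ∈ candsA rows cols (k / cols) (k % cols)
      exact mem_candsA_right rows cols _ _ hb
    · rw [← val_cell, hval]
    · rw [hp]
      show (k / cols, k % cols) ∈ candsA rows cols (k / cols) (k % cols + 1)
      simpa using mem_candsA_left rows cols (k / cols) (k % cols + 1) (Nat.le_add_left 1 _)
    · rw [← val_cell]

theorem conn_reach {g : List (List Int)} {rows cols : Nat} :
    ∀ x y, conn (edgeU g rows cols (rows * cols)) x y → x = y ∨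
      (valB g cols x ≠ 0 ∧ valB g cols x = valB g cols y ∧ x < rows * cols ∧ y < rows * cols ∧
        ReachC g rows cols (valB g cols x) (toPair cols x) (toPair cols y)) := by
  intro x y h
  induction h with
  | refl => exact Or.inl rfl
  | @tail u v hxu hs ih =>
    have hstep : valB g cols u ≠ 0 ∧ valB g cols u = valB g cols v ∧ u < rows * cols ∧
        v < rows * cols ∧ AdjC g rows cols (valB g cols u) (toPair cols u) (toPair cols v) := by
      rcases hs with ⟨he, hk⟩ | ⟨he, hk⟩
      · obtain ⟨hl, ha1, _⟩ := edge_adj he hk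
        exact ⟨he.1, he.2.1.symm, hk, hl, ha1⟩
      · obtain ⟨hl, _, ha2⟩ := edge_adj he hk
        refine ⟨?_, he.2.1, hl, hk, ?_⟩
        · rw [he.2.1]; exact he.1
        · rw [he.2.1]; exact ha2
    rcases ih with rfl | ⟨h1, h2, h3, h4, h5⟩
    · exact Or.inr ⟨hstep.1, hstep.2.1, hstep.2.2.1, hstep.2.2.2.1,
        Relation.ReflTransGen.single hstep.2.2.2.2⟩
    · refine Or.inr ⟨h1, h2.trans hstep.2.1, h3, hstep.2.2.2.1, ?_⟩
      refine Relation.ReflTransGen.tail h5 ?_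
      rw [h2]
      exact hstep.2.2.2.2

theorem reach_conn {g : List (List Int)} {rows cols : Nat} (x : Nat) (hx : x < rows * cols)
    (hv : valB g cols x ≠ 0) :
    ∀ P : Nat × Nat, ReachC g rows cols (valB g cols x) (toPair cols x) P →
      conn (edgeU g rows cols (rows * cols)) x (toIdx cols P) := by
  have hc : 0 < cols := cols_pos_of_lt rows cols x hx
  intro P h
  induction h with
  | refl => rw [toIdx_toPair hc]; exact Relation.ReflTransGen.refl
  | @tail u q hu hadj ih =>
    have huB : inB rows cols u := reach_inB (toPair_inB hx) hu
    have hqB : inB rows cols q := candsA_inB huB.1 huB.2 hadj.1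
    have hcu : cellA g u.1 u.2 = valB g cols x := by
      rcases reach_color hu with h | h
      · rw [h, ← val_cell]
      · exact h
    obtain ⟨hu1, hu2⟩ := huB
    obtain ⟨hq1, hq2⟩ := hqB
    have huIdx : toPair cols (toIdx cols u) = u := toPair_toIdx hu2
    have hqIdx : toPair cols (toIdx cols q) = q := toPair_toIdx hq2
    have hvu : valB g cols (toIdx cols u) = valB g cols x := by
      rw [val_cell, huIdx]; exact hcu
    have hvq : valB g cols (toIdx cols q) = valB g cols x := by
      rw [val_cell, hqIdx]; exact hadj.2
    refine Relation.ReflTransGen.tail ih ?_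
    have hmem : (q.1, q.2) ∈ candsA rows cols u.1 u.2 := by
      obtain ⟨a, b⟩ := q; exact hadj.1
    rw [mem_candsA_iff] at hmem
    rcases hmem with ⟨h1, h2, h3⟩ | ⟨h1, h2, h3⟩ | ⟨h1, h2, h3⟩ | ⟨h1, h2, h3⟩
    · -- q is the UP neighbour: edge from q down to u
      refine Or.inr ⟨⟨by rw [hvq]; exact hv, by rw [hvu, hvq], Or.inl ⟨?_, ?_⟩⟩,
        toIdx_lt ⟨hq1, hq2⟩⟩
      · show toIdx cols u = toIdx cols q + cols
        show u.1 * cols + u.2 = q.1 * cols + q.2 + cols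
        have : u.1 = q.1 + 1 := by omega
        rw [this, h3]; ring
      · show (toIdx cols q) / cols + 1 < rows
        have hQ1 : (toIdx cols q) / cols = q.1 := congrArg Prod.fst hqIdx
        rw [hQ1]
        omega
    · -- q is the DOWN neighbour: edge from u down to q
      refine Or.inl ⟨⟨by rw [hvu]; exact hv, by rw [hvu, hvq], Or.inl ⟨?_, ?_⟩⟩,
        toIdx_lt ⟨hu1, hu2⟩⟩
      · show toIdx cols q = toIdx cols u + cols
        show q.1 * cols + q.2 = u.1 * cols + u.2 + cols
        rw [h2, h3]; ring
      · show (toIdx cols u) / cols + 1 < rows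
        have : (toIdx cols u) / cols = u.1 := congrArg Prod.fst huIdx
        rw [this]
        omega
    · -- q is the LEFT neighbour: edge from q right to u
      refine Or.inr ⟨⟨by rw [hvq]; exact hv, by rw [hvu, hvq], Or.inr ⟨?_, ?_⟩⟩,
        toIdx_lt ⟨hq1, hq2⟩⟩
      · show toIdx cols u = toIdx cols q + 1
        show u.1 * cols + u.2 = q.1 * cols + q.2 + 1
        rw [h2, h3]
        omega
      · show (toIdx cols q) % cols + 1 < cols
        have : (toIdx cols q) % cols = q.2 := congrArg Prod.snd hqIdx
        rw [this]
        omega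
    · -- q is the RIGHT neighbour: edge from u right to q
      refine Or.inl ⟨⟨by rw [hvu]; exact hv, by rw [hvu, hvq], Or.inr ⟨?_, ?_⟩⟩,
        toIdx_lt ⟨hu1, hu2⟩⟩
      · show toIdx cols q = toIdx cols u + 1
        show q.1 * cols + q.2 = u.1 * cols + u.2 + 1
        rw [h2, h3]
        omega
      · show (toIdx cols u) % cols + 1 < cols
        have : (toIdx cols u) % cols = u.2 := congrArg Prod.snd huIdx
        rw [this]
        omega
-- ---- roots, class minima, and B's collected components ----
theorem root_iff_min {g : List (List Int)} {rows cols : Nat} {pF : List Nat} (hinv : ufInv pF)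
    (hchar : ∀ x y, ufR pF x = ufR pF y ↔ conn (edgeU g rows cols (rows * cols)) x y) (k : Nat) :
    ufR pF k = k ↔ ∀ t, conn (edgeU g rows cols (rows * cols)) k t → k ≤ t := by
  constructor
  · intro hroot t hconn
    have := (hchar k t).2 hconn
    calc k = ufR pF t := by rw [← this, hroot]
    _ ≤ t := (ufR_spec hinv t).2
  · intro hmin
    have hconn : conn (edgeU g rows cols (rows * cols)) k (ufR pF k) :=
      (hchar k (ufR pF k)).1 (ufR_idem hinv k).symm
    exact le_antisymm ((ufR_spec hinv k).2) (hmin _ hconn)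

theorem compB_mem {g : List (List Int)} {rows cols : Nat} {pF : List Nat}
    (hchar : ∀ x y, ufR pF x = ufR pF y ↔ conn (edgeU g rows cols (rows * cols)) x y)
    {k : Nat} (hkn : k < rows * cols) (hv : valB g cols k ≠ 0) (hroot : ufR pF k = k) :
    ∀ x : Nat × Nat,
      x ∈ ((List.range (rows * cols)).filter
          (fun t => decide (valB g cols t ≠ 0 ∧ ufFind pF (t + 1) t = k))).map
          (fun t => (t / cols, t % cols)) ↔
        ReachC g rows cols (valB g cols k) (toPair cols k) x := by
  have hc : 0 < cols := cols_pos_of_lt rows cols k hkn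
  intro x
  constructor
  · intro hx
    obtain ⟨t, htf, rfl⟩ := List.mem_map.1 hx
    obtain ⟨htn, htc⟩ := List.mem_filter.1 htf
    rw [List.mem_range] at htn
    obtain ⟨hvt, hrt⟩ := of_decide_eq_true htc
    have hrt' : ufR pF t = ufR pF k := by
      rw [show ufR pF t = ufFind pF (t + 1) t from rfl, hrt, hroot]
    have hconnkt : conn (edgeU g rows cols (rows * cols)) k t :=
      conn_symm ((hchar t k).1 hrt')
    show ReachC g rows cols (valB g cols k) (toPair cols k) (toPair cols t)
    rcases conn_reach k t hconnkt with heq | ⟨_, _, _, _, hre⟩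
    · rw [← heq]
      exact Relation.ReflTransGen.refl
    · exact hre
  · intro hre
    have hxB : inB rows cols x := reach_inB (toPair_inB hkn) hre
    have hvx : valB g cols (toIdx cols x) = valB g cols k := by
      rw [val_cell g cols (toIdx cols x), toPair_toIdx hxB.2]
      rcases reach_color hre with h | h
      · rw [h, ← val_cell]
      · exact h
    have hconn : conn (edgeU g rows cols (rows * cols)) k (toIdx cols x) :=
      reach_conn k hkn hv x hre
    refine List.mem_map.2 ⟨toIdx cols x, List.mem_filter.2 ⟨?_, ?_⟩, ?_⟩
    · rw [List.mem_range]
      exact toIdx_lt hxB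
    · refine decide_eq_true ⟨by rw [hvx]; exact hv, ?_⟩
      show ufR pF (toIdx cols x) = k
      rw [← (hchar k (toIdx cols x)).2 hconn, hroot]
    · exact toPair_toIdx hxB.2

theorem compB_nodup {g : List (List Int)} {rows cols : Nat} (pF : List Nat) (k : Nat) :
    (((List.range (rows * cols)).filter
        (fun t => decide (valB g cols t ≠ 0 ∧ ufFind pF (t + 1) t = k))).map
        (fun t => (t / cols, t % cols))).Nodup := by
  rcases Nat.eq_zero_or_pos cols with hc | hc
  · subst hc
    simp
  · refine List.Nodup.map_on ?_ ((List.nodup_range).filter _)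
    intro t ht t' ht' heq
    have h1 : toPair cols t = toPair cols t' := heq
    calc t = toIdx cols (toPair cols t) := (toIdx_toPair hc t).symm
    _ = toIdx cols (toPair cols t') := by rw [h1]
    _ = t' := toIdx_toPair hc t'
-- ---- the main lockstep loop: A's scan against B's collection pass ----
theorem main_loop {g : List (List Int)} {rows cols : Nat}
    (_hrows : rows = g.length) (_hcols : cols = (g.headD []).length)
    {pF : List Nat} (hinv : ufInv pF)
    (hchar : ∀ x y, ufR pF x = ufR pF y ↔ conn (edgeU g rows cols (rows * cols)) x y) :
    ∀ (L P : List (Nat × Nat)), allIdx rows cols = P ++ L →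
    ∀ (visA : PySem.Set (Nat × Nat)) (outA : List (List Int)) (accB : PySem.Set (Nat × Nat)),
    (∀ x, x ∈ visA ↔ ∃ q ∈ P, cellA g q.1 q.2 ≠ 0 ∧ ReachC g rows cols (cellA g q.1 q.2) q x) →
    outA = render g accB → accB.Nodup →
    (L.foldl (fun st p => scanCellA g rows cols st p.1 p.2) (visA, outA)).2 =
      render g (L.foldl (fun acc p => collectB g rows cols pF acc (toIdx cols p)) accB) := by
  intro L
  induction L with
  | nil =>
    intro P hPL visA outA accB hvis houtA hacc
    simpa using houtA
  | cons q L ih =>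
    intro P hPL visA outA accB hvis houtA hacc
    obtain ⟨qa, qb⟩ := q
    have hqAll : (qa, qb) ∈ allIdx rows cols := by
      rw [hPL]; exact List.mem_append_right _ List.mem_cons_self
    have hq : inB rows cols (qa, qb) := (mem_allIdx rows cols _).1 hqAll
    have hc : 0 < cols := by
      have := hq.2; omega
    have hkn : toIdx cols (qa, qb) < rows * cols := toIdx_lt hq
    have htp : toPair cols (toIdx cols (qa, qb)) = (qa, qb) := toPair_toIdx hq.2
    have hvk : valB g cols (toIdx cols (qa, qb)) = cellA g qa qb := by
      rw [val_cell, htp]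
    have hPin : ∀ x ∈ P, inB rows cols x := fun x hx =>
      (mem_allIdx rows cols x).1 (by rw [hPL]; exact List.mem_append_left _ hx)
    have hnd := nodup_allIdx rows cols
    rw [hPL] at hnd
    have hdisj := (List.nodup_append.mp hnd).2.2
    have hqnotP : (qa, qb) ∉ P := fun hqP => (hdisj _ hqP _ List.mem_cons_self) rfl
    have hpw := pairwise_allIdx rows cols
    rw [hPL] at hpw
    have hPlt : ∀ x ∈ P, lexLt x (qa, qb) := fun x hx =>
      (List.pairwise_append.1 hpw).2.2 x hx _ List.mem_cons_self
    have hLgt : ∀ x ∈ L, lexLt (qa, qb) x :=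
      (List.pairwise_cons.1 (List.pairwise_append.1 hpw).2.1).1
    have hPL' : allIdx rows cols = (P ++ [(qa, qb)]) ++ L := by
      rw [hPL, List.append_assoc]; rfl
    simp only [List.foldl_cons]
    by_cases hz : cellA g qa qb = 0
    · -- zero cell: both sides unchanged
      have eA : scanCellA g rows cols (visA, outA) qa qb = (visA, outA) := by
        simp only [scanCellA]
        rw [if_neg (by rintro ⟨h0, -⟩; exact h0 hz)]
      have eB : collectB g rows cols pF accB (toIdx cols (qa, qb)) = accB := by
        simp only [collectB]
        rw [if_neg (by rintro ⟨h0, -⟩; exact h0 (by rw [hvk]; exact hz))]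
      rw [eA, eB]
      refine ih (P ++ [(qa, qb)]) hPL' visA outA accB ?_ houtA hacc
      intro x
      constructor
      · intro hx
        obtain ⟨t, h1, h2, h3⟩ := (hvis x).1 hx
        exact ⟨t, List.mem_append_left _ h1, h2, h3⟩
      · rintro ⟨t, h1, h2, h3⟩
        rcases List.mem_append.1 h1 with h1 | h1
        · exact (hvis x).2 ⟨t, h1, h2, h3⟩
        · rw [List.mem_singleton] at h1; subst h1
          exact absurd hz h2
    · by_cases hv : (qa, qb) ∈ visA
      · -- already visited: A skips, and B skips since the root is an earlier cell
        have eA : scanCellA g rows cols (visA, outA) qa qb = (visA, outA) := by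
          simp only [scanCellA]
          rw [if_neg (by rintro ⟨-, hnv⟩; exact hnv hv)]
        obtain ⟨q', hq'P, hq'0, hq'R⟩ := (hvis _).1 hv
        have hq'ne : q' ≠ (qa, qb) := fun h => hqnotP (h ▸ hq'P)
        have hcq' : cellA g q'.1 q'.2 = cellA g qa qb := by
          rcases reach_color hq'R with h | h
          · exact absurd h.symm hq'ne
          · have h2 : cellA g qa qb = cellA g q'.1 q'.2 := h
            exact h2.symm
        have hq'in : inB rows cols q' := hPin q' hq'P
        have hq'R' : ReachC g rows cols (cellA g qa qb) q' (qa, qb) := hcq' ▸ hq'R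
        have hsymm : ReachC g rows cols (cellA g qa qb) (qa, qb) q' :=
          reach_symm hq'in hcq' hq'R'
        have hconn : conn (edgeU g rows cols (rows * cols)) (toIdx cols (qa, qb)) (toIdx cols q') :=
          reach_conn _ hkn (by rw [hvk]; exact hz) q' (by rw [hvk, htp]; exact hsymm)
        have ht'lt : toIdx cols q' < toIdx cols (qa, qb) :=
          toIdx_lt_of_lex hq'in hq (hPlt q' hq'P)
        have hnoroot : ufR pF (toIdx cols (qa, qb)) ≠ toIdx cols (qa, qb) := by
          intro hroot
          have := (root_iff_min hinv hchar _).1 hroot _ hconn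
          omega
        have eB : collectB g rows cols pF accB (toIdx cols (qa, qb)) = accB := by
          simp only [collectB]
          rw [if_neg (by rintro ⟨-, hr⟩; exact hnoroot hr)]
        rw [eA, eB]
        refine ih (P ++ [(qa, qb)]) hPL' visA outA accB ?_ houtA hacc
        intro x
        constructor
        · intro hx
          obtain ⟨t, h1, h2, h3⟩ := (hvis x).1 hx
          exact ⟨t, List.mem_append_left _ h1, h2, h3⟩
        · rintro ⟨t, h1, h2, h3⟩
          rcases List.mem_append.1 h1 with h1 | h1
          · exact (hvis x).2 ⟨t, h1, h2, h3⟩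
          · rw [List.mem_singleton] at h1; subst h1
            exact visA_forward hvis hv h3
      · -- fresh component
        have hdisV : ∀ x ∈ visA, ¬ ReachC g rows cols (cellA g qa qb) (qa, qb) x :=
          fun x hx hR => hv (visA_absorb hvis hq hx hR)
        obtain ⟨hcompA, hndA, hvisA'⟩ := bfsLoopA_spec (p := ((qa : Nat), qb)) hq rfl hdisV
            (rows * cols + 1) [(qa, qb)] (PySem.Set.add visA (qa, qb)) [(qa, qb)]
            (by intro x hx; rw [List.mem_singleton] at hx; subst hx
                exact Relation.ReflTransGen.refl)
            (fun x hx => hx)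
            (by intro x; rw [PySem.Set.mem_add]; simp)
            (by intro x hx hnq; rw [List.mem_singleton] at hx; subst hx
                exact absurd (List.mem_singleton.2 rfl) hnq)
            (List.nodup_singleton _) (List.mem_singleton.2 rfl)
            (by show 1 + rows * cols ≤ rows * cols + 1 + 1; omega)
        -- B's cell is the root of its class: it is the least index in the component
        have hroot : ufR pF (toIdx cols (qa, qb)) = toIdx cols (qa, qb) := by
          rw [root_iff_min hinv hchar]
          intro t hconn
          rcases conn_reach _ t hconn with heq | ⟨hv1, hv2, hv3, hv4, hre⟩
          · omega
          · by_contra hlt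
            have hxB : inB rows cols (toPair cols t) := toPair_inB hv4
            have hlex : lexLt (toPair cols t) (qa, qb) := by
              apply lex_of_toIdx_lt hxB hq
              rw [toIdx_toPair hc]
              omega
            have hxAll : toPair cols t ∈ allIdx rows cols := (mem_allIdx rows cols _).2 hxB
            rw [hPL] at hxAll
            rcases List.mem_append.1 hxAll with hxP | hxQL
            · -- an earlier cell of the same component would already be visited
              rw [hvk, htp] at hre
              have hcellx : cellA g (toPair cols t).1 (toPair cols t).2 = cellA g qa qb := by
                rw [← val_cell, ← hv2, hvk]
              have hsymx : ReachC g rows cols (cellA g qa qb) (toPair cols t) (qa, qb) :=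
                reach_symm hq rfl hre
              exact hv ((hvis _).2 ⟨toPair cols t, hxP, by rw [hcellx]; exact hz,
                by rw [hcellx]; exact hsymx⟩)
            · rcases List.mem_cons.1 hxQL with hxq | hxL
              · have : t = toIdx cols (qa, qb) := by
                  rw [← toIdx_toPair hc t, hxq]
                omega
              · have h1 := toIdx_lt_of_lex hq hxB (hLgt _ hxL)
                have h2 := toIdx_lt_of_lex hxB hq hlex
                omega
        -- the two component lists hold the same cells
        have hcompB : ∀ x, x ∈ ((List.range (rows * cols)).filter
            (fun t => decide (valB g cols t ≠ 0 ∧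
              ufFind pF (t + 1) t = toIdx cols (qa, qb)))).map
            (fun t => (t / cols, t % cols)) ↔
            ReachC g rows cols (cellA g qa qb) (qa, qb) x := by
          intro x
          rw [compB_mem hchar hkn (by rw [hvk]; exact hz) hroot x, hvk, htp]
        have hndB := compB_nodup (g := g) (rows := rows) (cols := cols) pF (toIdx cols (qa, qb))
        have hsetAB : ∀ x, x ∈ (bfsLoopA g rows cols (cellA g qa qb) (rows * cols + 1)
            [(qa, qb)] (PySem.Set.add visA (qa, qb)) [(qa, qb)]).2 ↔
            x ∈ ((List.range (rows * cols)).filter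
              (fun t => decide (valB g cols t ≠ 0 ∧
                ufFind pF (t + 1) t = toIdx cols (qa, qb)))).map
              (fun t => (t / cols, t % cols)) :=
          fun x => (hcompA x).trans (hcompB x).symm
        have hpermAB := (List.perm_ext_iff_of_nodup hndA hndB).2 hsetAB
        have hlenAB := hpermAB.length_eq
        have hAne : (bfsLoopA g rows cols (cellA g qa qb) (rows * cols + 1)
            [(qa, qb)] (PySem.Set.add visA (qa, qb)) [(qa, qb)]).2 ≠ [] :=
          List.ne_nil_of_mem ((hcompA _).2 Relation.ReflTransGen.refl)
        have hBne : ((List.range (rows * cols)).filter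
            (fun t => decide (valB g cols t ≠ 0 ∧
              ufFind pF (t + 1) t = toIdx cols (qa, qb)))).map
            (fun t => (t / cols, t % cols)) ≠ [] :=
          List.ne_nil_of_mem ((hcompB _).2 Relation.ReflTransGen.refl)
        have hmapf : ∀ (f : Nat × Nat → Nat) x,
            x ∈ (((List.range (rows * cols)).filter
              (fun t => decide (valB g cols t ≠ 0 ∧
                ufFind pF (t + 1) t = toIdx cols (qa, qb)))).map
              (fun t => (t / cols, t % cols))).map f ↔
            x ∈ (bfsLoopA g rows cols (cellA g qa qb) (rows * cols + 1)
              [(qa, qb)] (PySem.Set.add visA (qa, qb)) [(qa, qb)]).2.map f := by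
          intro f x
          constructor
          · intro hx
            obtain ⟨y, hy, rfl⟩ := List.mem_map.1 hx
            exact List.mem_map.2 ⟨y, (hsetAB y).2 hy, rfl⟩
          · intro hx
            obtain ⟨y, hy, rfl⟩ := List.mem_map.1 hx
            exact List.mem_map.2 ⟨y, (hsetAB y).1 hy, rfl⟩
        have hminRf := pyMin_eq_minN (hmapf Prod.fst)
          (by simpa [List.map_eq_nil_iff] using hBne) (by simpa [List.map_eq_nil_iff] using hAne)
        have hmaxRf := pyMax_eq_maxN (hmapf Prod.fst)
          (by simpa [List.map_eq_nil_iff] using hBne) (by simpa [List.map_eq_nil_iff] using hAne)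
        have hminCf := pyMin_eq_minN (hmapf Prod.snd)
          (by simpa [List.map_eq_nil_iff] using hBne) (by simpa [List.map_eq_nil_iff] using hAne)
        have hmaxCf := pyMax_eq_maxN (hmapf Prod.snd)
          (by simpa [List.map_eq_nil_iff] using hBne) (by simpa [List.map_eq_nil_iff] using hAne)
        -- updated visited-invariant for the recursive call
        have hvis' : ∀ x, x ∈ (bfsLoopA g rows cols (cellA g qa qb) (rows * cols + 1)
            [(qa, qb)] (PySem.Set.add visA (qa, qb)) [(qa, qb)]).1 ↔
            ∃ t ∈ P ++ [((qa : Nat), qb)], cellA g t.1 t.2 ≠ 0 ∧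
              ReachC g rows cols (cellA g t.1 t.2) t x := by
          intro x
          rw [hvisA' x]
          constructor
          · rintro (hx | hR)
            · obtain ⟨t, h1, h2, h3⟩ := (hvis x).1 hx
              exact ⟨t, List.mem_append_left _ h1, h2, h3⟩
            · exact ⟨(qa, qb), List.mem_append_right _ (List.mem_singleton.2 rfl), hz, hR⟩
          · rintro ⟨t, h1, h2, h3⟩
            rcases List.mem_append.1 h1 with h1 | h1
            · exact Or.inl ((hvis x).2 ⟨t, h1, h2, h3⟩)
            · rw [List.mem_singleton] at h1; subst h1
              exact Or.inr h3
        simp only [scanCellA, collectB]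
        rw [if_pos (show cellA g qa qb ≠ 0 ∧ (qa, qb) ∉ visA from ⟨hz, hv⟩),
          if_pos (show valB g cols (toIdx cols (qa, qb)) ≠ 0 ∧
            ufFind pF (toIdx cols (qa, qb) + 1) (toIdx cols (qa, qb)) = toIdx cols (qa, qb) from
            ⟨by rw [hvk]; exact hz, hroot⟩)]
        rw [hminRf, hmaxRf, hminCf, hmaxCf, ← hlenAB]
        by_cases hqal : 3 ≤ maxN ((bfsLoopA g rows cols (cellA g qa qb) (rows * cols + 1)
              [(qa, qb)] (PySem.Set.add visA (qa, qb)) [(qa, qb)]).2.map Prod.fst) -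
              minN ((bfsLoopA g rows cols (cellA g qa qb) (rows * cols + 1)
              [(qa, qb)] (PySem.Set.add visA (qa, qb)) [(qa, qb)]).2.map Prod.fst) + 1 ∧
            3 ≤ maxN ((bfsLoopA g rows cols (cellA g qa qb) (rows * cols + 1)
              [(qa, qb)] (PySem.Set.add visA (qa, qb)) [(qa, qb)]).2.map Prod.snd) -
              minN ((bfsLoopA g rows cols (cellA g qa qb) (rows * cols + 1)
              [(qa, qb)] (PySem.Set.add visA (qa, qb)) [(qa, qb)]).2.map Prod.snd) + 1 ∧
            (bfsLoopA g rows cols (cellA g qa qb) (rows * cols + 1)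
              [(qa, qb)] (PySem.Set.add visA (qa, qb)) [(qa, qb)]).2.length =
              2 * ((maxN ((bfsLoopA g rows cols (cellA g qa qb) (rows * cols + 1)
                [(qa, qb)] (PySem.Set.add visA (qa, qb)) [(qa, qb)]).2.map Prod.fst) -
                minN ((bfsLoopA g rows cols (cellA g qa qb) (rows * cols + 1)
                [(qa, qb)] (PySem.Set.add visA (qa, qb)) [(qa, qb)]).2.map Prod.fst) + 1) +
                (maxN ((bfsLoopA g rows cols (cellA g qa qb) (rows * cols + 1)
                [(qa, qb)] (PySem.Set.add visA (qa, qb)) [(qa, qb)]).2.map Prod.snd) -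
                minN ((bfsLoopA g rows cols (cellA g qa qb) (rows * cols + 1)
                [(qa, qb)] (PySem.Set.add visA (qa, qb)) [(qa, qb)]).2.map Prod.snd) + 1)) - 4
        · rw [if_pos hqal, if_pos hqal]
          refine ih (P ++ [(qa, qb)]) hPL' _ _ _ hvis' ?_ (PySem.Set.nodup_update accB _ hacc)
          rw [houtA, render_clearRect]
          exact render_congr (fun p => by
            rw [List.mem_append, PySem.Set.mem_update])
        · rw [if_neg hqal, if_neg hqal]
          exact ih (P ++ [(qa, qb)]) hPL' _ _ _ hvis' houtA hacc
-- ---- assembling the verdict ----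
theorem allIdx_map_toIdx (rows cols : Nat) :
    (allIdx rows cols).map (toIdx cols) = List.range (rows * cols) := by
  induction rows with
  | zero => simp [allIdx]
  | succ rows ih =>
    have h1 : allIdx (rows + 1) cols =
        allIdx rows cols ++ (List.range cols).map (fun j => (rows, j)) := by
      simp [allIdx, List.range_succ]
    have h2 : (rows + 1) * cols = rows * cols + cols := by ring
    rw [h1, List.map_append, ih, List.map_map, h2, List.range_add]
    rfl

theorem foldl_collect_range (g : List (List Int)) (rows cols : Nat) (pF : List Nat)
    (acc : PySem.Set (Nat × Nat)) :
    (List.range (rows * cols)).foldl (collectB g rows cols pF) acc =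
      (allIdx rows cols).foldl (fun a p => collectB g rows cols pF a (toIdx cols p)) acc := by
  rw [← allIdx_map_toIdx rows cols, List.foldl_map]
-- ===== VERDICT (by name: the statement is the Claim_ definition above) =====
theorem transform_spec : Claim_equal_transform := by
  unfold Claim_equal_transform
  intro g _hdom _hpre
  unfold Spec_transform
  by_cases hg : g = []
  · subst hg; rfl
  · show transform g = transform_alt g
    simp only [transform, transform_alt]
    rw [if_neg hg, if_neg hg]
    obtain ⟨hlen, hinv, hchar⟩ :=
      p1Inv_fold g g.length (g.headD []).length (g.length * (g.headD []).length) le_rfl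
    rw [nested_eq_flat (fun st i j => scanCellA g g.length (g.headD []).length st i j)]
    rw [foldl_collect_range]
    exact main_loop rfl rfl hinv hchar (allIdx g.length (g.headD []).length) [] rfl
      PySem.Set.empty g PySem.Set.empty
      (by intro x
          constructor
          · intro hx; exact absurd hx List.not_mem_nil
          · rintro ⟨t, ht, -, -⟩; exact absurd ht List.not_mem_nil)
      (render_empty g).symm List.nodup_nil
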